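-- pv_equiv track=rewrite | github.com/Fantastic-Fanta/Pokemon-Sprite-Tuner | src/img.py | _build_fading_contour
-- ===== SOURCE A (Python) =====
-- def _get_neighbors(x, y, width, height):
--     out = []
--     for dx in (-1, 0, 1):
--         for dy in (-1, 0, 1):
--             if dx == 0 and dy == 0:
--                 continue
--             nx, ny = x + dx, y + dy
--             if 0 <= nx < width and 0 <= ny < height:
--                 out.append((nx, ny))
--     return out
--
-- def _solid_neighbors_diagonal_only(idx, width, height, solid_mask):
--     y, x = idx // width, idx % width
--     has_ortho, has_diag = False, False
--     for dx in (-1, 0, 1):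
--         for dy in (-1, 0, 1):
--             if dx == 0 and dy == 0:
--                 continue
--             nx, ny = x + dx, y + dy
--             if 0 <= nx < width and 0 <= ny < height and solid_mask[ny * width + nx]:
--                 if dx == 0 or dy == 0:
--                     has_ortho = True
--                 else:
--                     has_diag = True
--     return has_diag and not has_ortho
--
-- def _build_fading_contour(
--     width,
--     height,
--     solid_mask,
--     contour_rings=5,
-- ):
--     INF = 1 << 30
--     dist = [INF] * (width * height)
--     for y in range(height):
--         for x in range(width):
--             idx = y * width + x
--             if solid_mask[idx]:
--                 dist[idx] = 0
--
--     current = set()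
--     for idx in range(width * height):
--         if dist[idx] == 0:
--             y, x = idx // width, idx % width
--             for nx, ny in _get_neighbors(x, y, width, height):
--                 nidx = ny * width + nx
--                 if not solid_mask[nidx]:
--                     current.add(nidx)
--
--     d = 1
--     while current and d <= contour_rings:
--         next_front = set()
--         for idx in current:
--             if dist[idx] > d:
--                 dist[idx] = d
--                 y, x = idx // width, idx % width
--                 for nx, ny in _get_neighbors(x, y, width, height):
--                     nidx = ny * width + nx
--                     if not solid_mask[nidx] and dist[nidx] == INF:
--                         next_front.add(nidx)
--         current = next_front
--         d += 1
--
--     result = [None] * (width * height)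
--     for idx in range(width * height):
--         if solid_mask[idx] or dist[idx] == INF or dist[idx] > contour_rings:
--             result[idx] = None
--         else:
--             ring = dist[idx] - 1
--             if ring == 0 and _solid_neighbors_diagonal_only(idx, width, height, solid_mask):
--                 ring = 1
--             result[idx] = ring
--
--     return result
-- ===== SOURCE B (Python) =====
-- def _build_fading_contour(
--     width,
--     height,
--     solid_mask,
--     contour_rings=5,
-- ):
--     # Closed-form: on an obstacle-free grid, 8-connected BFS distance from the
--     # solid set equals the minimum Chebyshev distance to a solid pixel.
--     out = [None] * (width * height)
--     solids = [(x, y)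
--               for y in range(height)
--               for x in range(width)
--               if solid_mask[y * width + x]]
--     for y in range(height):
--         for x in range(width):
--             idx = y * width + x
--             if solid_mask[idx]:
--                 continue
--             d = min((max(abs(x - sx), abs(y - sy)) for sx, sy in solids),
--                     default=None)
--             if d is None or d > contour_rings:
--                 continue
--             if d == 1 and any(abs(x - sx) == 1 and abs(y - sy) == 1 for sx, sy in solids) \
--                     and not any(abs(x - sx) + abs(y - sy) == 1 for sx, sy in solids):
--                 out[idx] = 1
--             else:
--                 out[idx] = d - 1
--     return out
-- ===== Notes on version B (the rewrite author's own statement) =====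
-- stated objective: alternative
-- what changed: Replaces the frontier-set BFS ring propagation by a closed-form per-pixel minimum Chebyshev distance to the list of solid pixels (valid because the grid is obstacle-free, so 8-connected BFS distance equals Chebyshev distance), with the diagonal-only special case decided by scanning the same solid list.
import Mathlib
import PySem

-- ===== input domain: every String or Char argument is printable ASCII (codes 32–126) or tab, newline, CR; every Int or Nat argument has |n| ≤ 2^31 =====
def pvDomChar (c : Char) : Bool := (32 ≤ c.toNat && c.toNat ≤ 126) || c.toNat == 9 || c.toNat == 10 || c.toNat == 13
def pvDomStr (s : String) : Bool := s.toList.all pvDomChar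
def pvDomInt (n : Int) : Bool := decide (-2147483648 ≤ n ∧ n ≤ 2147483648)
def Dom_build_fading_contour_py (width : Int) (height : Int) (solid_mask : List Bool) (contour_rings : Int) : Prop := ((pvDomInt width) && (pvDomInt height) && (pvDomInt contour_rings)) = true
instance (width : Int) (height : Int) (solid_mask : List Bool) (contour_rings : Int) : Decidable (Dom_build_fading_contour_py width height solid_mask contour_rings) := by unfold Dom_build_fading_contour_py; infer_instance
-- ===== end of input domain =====

-- B replaces A's frontier-set BFS by a closed-form computation: on an obstacle-free grid
-- the 8-connected BFS distance from the solid set equals the minimum Chebyshev distance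
-- to a solid pixel, so B scans the solid-pixel list per cell; objective: alternative.

-- ===== PORT A =====
def pvA_get_neighbors (x : Int) (y : Int) (width : Int) (height : Int) : List (Int × Int) :=
  [(-1 : Int), 0, 1].foldl (fun out dx =>
    [(-1 : Int), 0, 1].foldl (fun out dy =>
      if dx = 0 ∧ dy = 0 then out
      else
        let nx := x + dx
        let ny := y + dy
        if 0 ≤ nx ∧ nx < width ∧ 0 ≤ ny ∧ ny < height then out ++ [(nx, ny)] else out) out) []

def pvA_solid_neighbors_diagonal_only (idx : Int) (width : Int) (height : Int) (solid_mask : List Bool) : Bool :=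
  let y := PySem.Int.floordiv idx width
  let x := PySem.Int.mod idx width
  let st := [(-1 : Int), 0, 1].foldl (fun (st : Bool × Bool) dx =>
    [(-1 : Int), 0, 1].foldl (fun (st : Bool × Bool) dy =>
      if dx = 0 ∧ dy = 0 then st
      else
        let nx := x + dx
        let ny := y + dy
        if (0 ≤ nx ∧ nx < width ∧ 0 ≤ ny ∧ ny < height) ∧
            PySem.List.pyGetD solid_mask (ny * width + nx) false = true then
          if dx = 0 ∨ dy = 0 then (true, st.2) else (st.1, true)
        else st) st) (false, false)
  st.2 && !st.1

def pvA_loop (width : Int) (height : Int) (solid_mask : List Bool) (contour_rings : Int)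
    (dist : List Int) (current : PySem.Set Int) (d : Int) : List Int :=
  if h : current ≠ [] ∧ d ≤ contour_rings then
    let st := current.foldl (fun (st : List Int × PySem.Set Int) idx =>
      if PySem.List.pyGetD st.1 idx 0 > d then
        let dist' := PySem.List.pySetD st.1 idx d
        let y := PySem.Int.floordiv idx width
        let x := PySem.Int.mod idx width
        let nf := (pvA_get_neighbors x y width height).foldl (fun nf p =>
          if PySem.List.pyGetD solid_mask (p.2 * width + p.1) false = false ∧
              PySem.List.pyGetD dist' (p.2 * width + p.1) 0 = (1 : Int) <<< 30 then
            PySem.Set.add nf (p.2 * width + p.1)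
          else nf) st.2
        (dist', nf)
      else st) (dist, (PySem.Set.empty : PySem.Set Int))
    pvA_loop width height solid_mask contour_rings st.1 st.2 (d + 1)
  else dist
termination_by (contour_rings + 1 - d).toNat
decreasing_by omega

def build_fading_contour_py (width : Int) (height : Int) (solid_mask : List Bool) (contour_rings : Int) : List (Option Int) :=
  let INF : Int := (1 : Int) <<< 30
  let dist : List Int := List.replicate (width * height).toNat INF
  let dist := (PySem.List.pyRange 0 height 1).foldl (fun dist y =>
    (PySem.List.pyRange 0 width 1).foldl (fun dist x =>
      let idx := y * width + x
      if PySem.List.pyGetD solid_mask idx false = true then PySem.List.pySetD dist idx 0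
      else dist) dist) dist
  let current : PySem.Set Int := (PySem.List.pyRange 0 (width * height) 1).foldl (fun cur idx =>
    if PySem.List.pyGetD dist idx 0 = 0 then
      let y := PySem.Int.floordiv idx width
      let x := PySem.Int.mod idx width
      (pvA_get_neighbors x y width height).foldl (fun cur p =>
        if PySem.List.pyGetD solid_mask (p.2 * width + p.1) false = false then
          PySem.Set.add cur (p.2 * width + p.1)
        else cur) cur
    else cur) (PySem.Set.empty : PySem.Set Int)
  let dist := pvA_loop width height solid_mask contour_rings dist current 1
  let result : List (Option Int) := List.replicate (width * height).toNat none
  (PySem.List.pyRange 0 (width * height) 1).foldl (fun result idx =>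
    if PySem.List.pyGetD solid_mask idx false = true ∨ PySem.List.pyGetD dist idx 0 = INF ∨
        PySem.List.pyGetD dist idx 0 > contour_rings then
      PySem.List.pySetD result idx none
    else
      let ring := PySem.List.pyGetD dist idx 0 - 1
      let ring := if ring = 0 ∧ pvA_solid_neighbors_diagonal_only idx width height solid_mask = true then (1 : Int) else ring
      PySem.List.pySetD result idx (some ring)) result

-- ===== PORT B =====
-- the list of solid pixels as (x, y) coordinate pairs, in Source B's comprehension order
def pvB_solids (width : Int) (height : Int) (solid_mask : List Bool) : List (Int × Int) :=
  (PySem.List.pyRange 0 height 1).flatMap (fun y =>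
    ((PySem.List.pyRange 0 width 1).filter
      (fun x => PySem.List.pyGetD solid_mask (y * width + x) false)).map (fun x => (x, y)))

-- min(（generator of Chebyshev distances), default=None)
def pvB_minCheb (x : Int) (y : Int) (solids : List (Int × Int)) : Option Int :=
  solids.foldl (fun acc s =>
    match acc with
    | none => some (max |x - s.1| |y - s.2|)
    | some m => some (min m (max |x - s.1| |y - s.2|))) none

def build_fading_contour_py_alt (width : Int) (height : Int) (solid_mask : List Bool) (contour_rings : Int) : List (Option Int) :=
  let out : List (Option Int) := List.replicate (width * height).toNat none
  let solids := pvB_solids width height solid_mask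
  (PySem.List.pyRange 0 height 1).foldl (fun out y =>
    (PySem.List.pyRange 0 width 1).foldl (fun out x =>
      let idx := y * width + x
      if PySem.List.pyGetD solid_mask idx false = true then out
      else
        match pvB_minCheb x y solids with
        | none => out
        | some d =>
          if d > contour_rings then out
          else if d = 1 ∧ solids.any (fun s => decide (|x - s.1| = 1 ∧ |y - s.2| = 1)) = true ∧
              ¬ (solids.any (fun s => decide (|x - s.1| + |y - s.2| = 1)) = true) then
            PySem.List.pySetD out idx (some 1)
          else PySem.List.pySetD out idx (some (d - 1))) out) out

-- ===== PRECONDITION & SPEC =====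
-- Pre_ excludes (a) grids larger than the mask, on which Python A raises IndexError, and
-- (b) ring caps ≥ 2^30 = A's INF sentinel, where A's BFS silently clips rings at the
-- sentinel while B's closed form does not (B could only match it by copying the sentinel).
def Pre_build_fading_contour_py (width : Int) (height : Int) (solid_mask : List Bool) (contour_rings : Int) : Prop :=
  width * height ≤ (solid_mask.length : Int) ∧ contour_rings < 1073741824
instance (width : Int) (height : Int) (solid_mask : List Bool) (contour_rings : Int) : Decidable (Pre_build_fading_contour_py width height solid_mask contour_rings) := by unfold Pre_build_fading_contour_py; infer_instance

def pvWitness_build_fading_contour_py : Int × Int × List Bool × Int := (2, 2, [true, false, false, false], 5)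

def Spec_build_fading_contour_py (width : Int) (height : Int) (solid_mask : List Bool) (contour_rings : Int) (out : List (Option Int)) : Prop := out = build_fading_contour_py_alt width height solid_mask contour_rings
instance (width : Int) (height : Int) (solid_mask : List Bool) (contour_rings : Int) (out : List (Option Int)) : Decidable (Spec_build_fading_contour_py width height solid_mask contour_rings out) := by unfold Spec_build_fading_contour_py; infer_instance

-- ===== CLAIM (what is proved, stated in full; the proofs are below) =====
def Claim_equal_build_fading_contour_py : Prop := ∀ (width : Int) (height : Int) (solid_mask : List Bool) (contour_rings : Int), Dom_build_fading_contour_py width height solid_mask contour_rings → Pre_build_fading_contour_py width height solid_mask contour_rings → Spec_build_fading_contour_py width height solid_mask contour_rings (build_fading_contour_py width height solid_mask contour_rings)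

-- ===== LEMMAS AND PROOFS =====

def pvINF : Int := (1 : Int) <<< 30

theorem pvINF_val : pvINF = 1073741824 := by decide

def pvAdj (w h i j : Int) : Prop :=
  ∃ xi yi xj yj : Int,
    0 ≤ xi ∧ xi < w ∧ 0 ≤ yi ∧ yi < h ∧ 0 ≤ xj ∧ xj < w ∧ 0 ≤ yj ∧ yj < h ∧
    i = yi * w + xi ∧ j = yj * w + xj ∧
    (xi - xj).natAbs ≤ 1 ∧ (yi - yj).natAbs ≤ 1 ∧ i ≠ j

theorem pvAdj_symm {w h i j : Int} (h1 : pvAdj w h i j) : pvAdj w h j i := by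
  obtain ⟨xi, yi, xj, yj, h1, h2, h3, h4, h5, h6, h7, h8, h9, h10, h11, h12, h13⟩ := h1
  exact ⟨xj, yj, xi, yi, h5, h6, h7, h8, h1, h2, h3, h4, h10, h9, by omega, by omega, Ne.symm h13⟩

theorem pvAdj_range {w h i j : Int} (h1 : pvAdj w h i j) :
    0 ≤ i ∧ i < w * h ∧ 0 ≤ j ∧ j < w * h := by
  obtain ⟨xi, yi, xj, yj, h1, h2, h3, h4, h5, h6, h7, h8, h9, h10, _⟩ := h1
  subst h9 h10
  refine ⟨by nlinarith, by nlinarith, by nlinarith, by nlinarith⟩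

theorem pv_coords (w h i : Int) (hw : 0 < w) (hh : 0 < h) (hi0 : 0 ≤ i) (hilt : i < w * h) :
    0 ≤ PySem.Int.mod i w ∧ PySem.Int.mod i w < w ∧
    0 ≤ PySem.Int.floordiv i w ∧ PySem.Int.floordiv i w < h ∧
    i = PySem.Int.floordiv i w * w + PySem.Int.mod i w := by
  have hmn := PySem.Int.mod_nonneg i hw
  have hml := PySem.Int.mod_lt i hw
  have hdm := PySem.Int.floordiv_mul_add_mod i w
  have hy0 : 0 ≤ PySem.Int.floordiv i w :=
    (PySem.Int.le_floordiv_iff_mul_le hw).mpr (by omega)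
  have hyh : PySem.Int.floordiv i w < h :=
    (PySem.Int.floordiv_lt_iff_lt_mul hw).mpr (by nlinarith)
  exact ⟨hmn, hml, hy0, hyh, by omega⟩

theorem pv_index_unique (w x y x' y' : Int) (hx : 0 ≤ x) (hxl : x < w) (hx' : 0 ≤ x') (hxl' : x' < w)
    (he : y * w + x = y' * w + x') : x = x' ∧ y = y' := by
  have key : y = y' := by
    rcases eq_or_ne y y' with he2 | hne
    · exact he2
    · exfalso
      rcases lt_or_gt_of_ne hne with hlt | hgt
      · have : (y - y') * w ≤ -w := by nlinarith
        have h1 : (y - y') * w = x' - x := by ring_nf; linarith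
        omega
      · have : w ≤ (y - y') * w := by nlinarith
        have h1 : (y - y') * w = x' - x := by ring_nf; linarith
        omega
  subst key
  constructor
  · omega
  · rfl

theorem pv_div_mod_of (w x y : Int) (hw : 0 < w) (hx0 : 0 ≤ x) (hxw : x < w) :
    PySem.Int.mod (y * w + x) w = x ∧ PySem.Int.floordiv (y * w + x) w = y := by
  have hmn := PySem.Int.mod_nonneg (y * w + x) hw
  have hml := PySem.Int.mod_lt (y * w + x) hw
  have hdm := PySem.Int.floordiv_mul_add_mod (y * w + x) w
  have := pv_index_unique w (PySem.Int.mod (y * w + x) w) (PySem.Int.floordiv (y * w + x) w)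
    x y hmn hml hx0 hxw (by omega)
  exact ⟨this.1, this.2⟩

theorem pv_getD_set {α : Type} (xs : List α) (i : Int) (v : α) (j : Int) (d : α)
    (hi0 : 0 ≤ i) (hilt : i < (xs.length : Int)) (hj0 : 0 ≤ j) :
    PySem.List.pyGetD (PySem.List.pySetD xs i v) j d = if j = i then v else PySem.List.pyGetD xs j d := by
  rw [PySem.List.pySetD_of_nonneg xs v hi0,
      PySem.List.pyGetD_of_nonneg _ _ hj0, PySem.List.pyGetD_of_nonneg _ _ hj0]
  rcases lt_or_ge j (xs.length : Int) with hlt | hge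
  · by_cases h : j = i
    · subst h
      have hjl : j.toNat < xs.length := by omega
      simp [List.getD_eq_getElem?_getD, List.getElem?_set_self, hjl]
    · simp [h, List.getD_eq_getElem?_getD, List.getElem?_set_ne (by omega : i.toNat ≠ j.toNat)]
  · have h : j ≠ i := by omega
    have hjl : xs.length ≤ j.toNat := by omega
    simp [h, List.getD_eq_getElem?_getD, List.getElem?_eq_none (by simpa using hjl),
      List.getElem?_eq_none (by simpa using hjl : (xs.set i.toNat v).length ≤ j.toNat)]

theorem pv_getD_eq_getElem' {α : Type} (xs : List α) (d : α) (k : Nat) (hk : k < xs.length) :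
    PySem.List.pyGetD xs (k : Int) d = xs[k] := by
  simp [PySem.List.pyGetD_natCast, List.getD_eq_getElem?_getD, hk]

theorem pv_getD_eq_getElem (xs : List Int) (k : Nat) (hk : k < xs.length) :
    PySem.List.pyGetD xs (k : Int) 0 = xs[k] := pv_getD_eq_getElem' xs 0 k hk

theorem pv_mem_foldl_step (l : List Int) (step : PySem.Set Int → Int → PySem.Set Int)
    (Q : Int → Int → Prop)
    (hstep : ∀ cur x, x ∈ l → ∀ j, (j ∈ step cur x ↔ j ∈ cur ∨ Q x j)) :
    ∀ cur j, j ∈ l.foldl step cur ↔ j ∈ cur ∨ ∃ x ∈ l, Q x j := by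
  induction l with
  | nil => simp
  | cons a t ih =>
    intro cur j
    rw [List.foldl_cons, ih (fun cur x hx => hstep cur x (List.mem_cons_of_mem a hx)),
      hstep cur a (List.mem_cons_self) j]
    simp only [List.mem_cons]
    constructor
    · rintro ((h | h) | ⟨x, hx, h⟩)
      · exact Or.inl h
      · exact Or.inr ⟨a, Or.inl rfl, h⟩
      · exact Or.inr ⟨x, Or.inr hx, h⟩
    · rintro (h | ⟨x, (rfl | hx), h⟩)
      · exact Or.inl (Or.inl h)
      · exact Or.inl (Or.inr h)
      · exact Or.inr ⟨x, hx, h⟩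

theorem pv_nodup_foldl_step (l : List Int) (step : PySem.Set Int → Int → PySem.Set Int)
    (hstep : ∀ cur x, x ∈ l → cur.Nodup → (step cur x).Nodup) :
    ∀ cur, cur.Nodup → (l.foldl step cur).Nodup := by
  induction l with
  | nil => intro cur h; simpa using h
  | cons a t ih =>
    intro cur h
    rw [List.foldl_cons]
    exact ih (fun cur x hx => hstep cur x (List.mem_cons_of_mem a hx)) _
      (hstep cur a (List.mem_cons_self) h)

theorem pv_fold_set_aux {α : Type} (g : Int → α) (N : Nat) (d : α) :
    ∀ (m : Nat) (init : List α), init.length = N → m ≤ N →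
      ((List.range m).foldl (fun res k => PySem.List.pySetD res ((k : Nat) : Int) (g k)) init).length = N ∧
      (∀ j : Int, 0 ≤ j →
        PySem.List.pyGetD ((List.range m).foldl
            (fun res k => PySem.List.pySetD res ((k : Nat) : Int) (g k)) init) j d =
          if j < (m : Int) then g j else PySem.List.pyGetD init j d) := by
  intro m
  induction m with
  | zero =>
    intro init hlen _
    refine ⟨by simpa using hlen, ?_⟩
    intro j hj0
    rw [if_neg (by omega : ¬ j < ((0:Nat) : Int))]
    simp
  | succ m ih =>
    intro init hlen hm
    obtain ⟨ihlen, ihval⟩ := ih init hlen (by omega)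
    rw [List.range_succ, List.foldl_append]
    simp only [List.foldl_cons, List.foldl_nil]
    refine ⟨by rw [PySem.List.length_pySetD, ihlen], ?_⟩
    intro j hj0
    rw [pv_getD_set _ _ _ _ _ (by omega) (by rw [ihlen]; exact_mod_cast (by omega : (m:Int) < (N:Int))) hj0]
    rw [ihval j hj0]
    by_cases h : j = (m : Int)
    · subst h
      simp
    · by_cases h2 : j < (m : Int) <;> simp [h, h2] <;> omega

def pvD_offsets : List (Int × Int) :=
  [(-1 : Int), 0, 1].flatMap (fun dx =>
    ([(-1 : Int), 0, 1].filter (fun dy => decide (¬(dx = 0 ∧ dy = 0)))).map (fun dy => (dx, dy)))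

def pvD_nbr_idxs (i : Int) (width : Int) (height : Int) : List Int :=
  let y := PySem.Int.floordiv i width
  let x := PySem.Int.mod i width
  (pvD_offsets.filter (fun p =>
      decide (0 ≤ x + p.1 ∧ x + p.1 < width ∧ 0 ≤ y + p.2 ∧ y + p.2 < height))).map
    (fun p => (y + p.2) * width + (x + p.1))

def pvD_solid_nbr (i : Int) (width : Int) (height : Int) (solid_mask : List Bool) (want_diag : Bool) : Bool :=
  let y := PySem.Int.floordiv i width
  let x := PySem.Int.mod i width
  (pvD_offsets.filter (fun p =>
      (want_diag == (decide (p.1 ≠ 0) && decide (p.2 ≠ 0))) &&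
      decide (0 ≤ x + p.1 ∧ x + p.1 < width ∧ 0 ≤ y + p.2 ∧ y + p.2 < height))).any
    (fun p => PySem.List.pyGetD solid_mask ((y + p.2) * width + (x + p.1)) false)

def pvD_step (width : Int) (height : Int) (dist : List Int) (d : Int) : List Int :=
  (PySem.List.enumerate dist 0).map (fun p =>
    if p.2 ≠ (1 : Int) <<< 30 then p.2
    else if (pvD_nbr_idxs p.1 width height).any (fun j => PySem.List.pyGetD dist j 0 == d - 1) then d
    else (1 : Int) <<< 30)

def pvD_loop (width : Int) (height : Int) (contour_rings : Int) (dist : List Int) (d : Int) : List Int :=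
  if h : d ≤ contour_rings then
    let new := pvD_step width height dist d
    if new = dist then dist else pvD_loop width height contour_rings new (d + 1)
  else dist
termination_by (contour_rings + 1 - d).toNat
decreasing_by omega

theorem pv_mem_offsets (q : Int × Int) :
    q ∈ pvD_offsets ↔ q.1.natAbs ≤ 1 ∧ q.2.natAbs ≤ 1 ∧ ¬(q.1 = 0 ∧ q.2 = 0) := by
  rcases q with ⟨a, b⟩
  simp only [pvD_offsets, List.mem_flatMap, List.mem_map, List.mem_filter, List.mem_cons,
    List.not_mem_nil, or_false, decide_eq_true_eq]
  constructor
  · rintro ⟨dx, hdx, dy, ⟨hdy, hne⟩, heq⟩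
    obtain ⟨rfl, rfl⟩ : dx = a ∧ dy = b := by
      simpa [Prod.ext_iff] using heq
    refine ⟨by omega, by omega, by tauto⟩
  · rintro ⟨ha, hb, hne⟩
    exact ⟨a, by omega, b, ⟨by omega, by tauto⟩, rfl⟩

theorem pv_mem_nbrA (x y w h : Int) (p : Int × Int) :
    p ∈ pvA_get_neighbors x y w h ↔
      (p.1 - x).natAbs ≤ 1 ∧ (p.2 - y).natAbs ≤ 1 ∧ ¬(p.1 = x ∧ p.2 = y) ∧
      0 ≤ p.1 ∧ p.1 < w ∧ 0 ≤ p.2 ∧ p.2 < h := by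
  have hinner : ∀ (dx : Int) (out : List (Int × Int)),
      List.foldl (fun out dy =>
        if dx = 0 ∧ dy = 0 then out
        else
          let nx := x + dx
          let ny := y + dy
          if 0 ≤ nx ∧ nx < w ∧ 0 ≤ ny ∧ ny < h then out ++ [(nx, ny)] else out) out [(-1 : Int), 0, 1] =
      out ++ (List.filter (fun dy =>
        decide (¬(dx = 0 ∧ dy = 0) ∧ 0 ≤ x + dx ∧ x + dx < w ∧ 0 ≤ y + dy ∧ y + dy < h)) [(-1 : Int), 0, 1]).map
        (fun dy => (x + dx, y + dy)) := by
    intro dx out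
    have hc := PySem.List.foldl_congr_mem [(-1 : Int), 0, 1]
      (fun out dy =>
        if dx = 0 ∧ dy = 0 then out
        else
          let nx := x + dx
          let ny := y + dy
          if 0 ≤ nx ∧ nx < w ∧ 0 ≤ ny ∧ ny < h then out ++ [(nx, ny)] else out)
      (fun out dy =>
        if (¬(dx = 0 ∧ dy = 0) ∧ 0 ≤ x + dx ∧ x + dx < w ∧ 0 ≤ y + dy ∧ y + dy < h) then
          out ++ [(x + dx, y + dy)] else out)
      out ?_
    · rw [hc, PySem.List.foldl_append_ite]
    · intro acc dy _
      by_cases h1 : dx = 0 ∧ dy = 0 <;>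
        by_cases h2 : 0 ≤ x + dx ∧ x + dx < w ∧ 0 ≤ y + dy ∧ y + dy < h <;>
        simp [h1, h2]
  have houter := PySem.List.foldl_congr_mem [(-1 : Int), 0, 1]
    (fun out dx =>
      List.foldl (fun out dy =>
        if dx = 0 ∧ dy = 0 then out
        else
          let nx := x + dx
          let ny := y + dy
          if 0 ≤ nx ∧ nx < w ∧ 0 ≤ ny ∧ ny < h then out ++ [(nx, ny)] else out) out [(-1 : Int), 0, 1])
    (fun out dx =>
      out ++ (List.filter (fun dy =>
        decide (¬(dx = 0 ∧ dy = 0) ∧ 0 ≤ x + dx ∧ x + dx < w ∧ 0 ≤ y + dy ∧ y + dy < h)) [(-1 : Int), 0, 1]).map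
        (fun dy => (x + dx, y + dy)))
    [] (fun acc dx _ => hinner dx acc)
  unfold pvA_get_neighbors
  rw [houter, PySem.List.foldl_append_eq_flatMap]
  rcases p with ⟨a, b⟩
  simp only [List.nil_append, List.mem_flatMap, List.mem_map, List.mem_filter, List.mem_cons,
    List.not_mem_nil, or_false, decide_eq_true_eq]
  constructor
  · rintro ⟨dx, hdx, dy, ⟨hdy, hne, hbnd⟩, heq⟩
    obtain ⟨rfl, rfl⟩ : x + dx = a ∧ y + dy = b := by simpa [Prod.ext_iff] using heq
    refine ⟨by omega, by omega, by omega, by omega, by omega, by omega, by omega⟩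
  · rintro ⟨ha, hb, hne, h1, h2, h3, h4⟩
    refine ⟨a - x, by omega, b - y, ⟨by omega, by omega, by simpa using ⟨h1, h2, h3, h4⟩⟩, by simp⟩

theorem pv_nbrA_idx (w h i j : Int) (hw : 0 < w) (hh : 0 < h) (hi0 : 0 ≤ i) (hilt : i < w * h) :
    (∃ p ∈ pvA_get_neighbors (PySem.Int.mod i w) (PySem.Int.floordiv i w) w h,
        j = p.2 * w + p.1) ↔ pvAdj w h i j := by
  obtain ⟨hx0, hxw, hy0, hyh, hdecomp⟩ := pv_coords w h i hw hh hi0 hilt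
  constructor
  · rintro ⟨⟨nx, ny⟩, hmem, rfl⟩
    rw [pv_mem_nbrA] at hmem
    dsimp only at hmem ⊢
    obtain ⟨h1, h2, h3, h4, h5, h6, h7⟩ := hmem
    refine ⟨PySem.Int.mod i w, PySem.Int.floordiv i w, nx, ny, hx0, hxw, hy0, hyh,
      h4, h5, h6, h7, hdecomp, rfl, by omega, by omega, ?_⟩
    intro hcontra
    have hu := pv_index_unique w (PySem.Int.mod i w) (PySem.Int.floordiv i w) nx ny hx0 hxw h4 h5
      (by linear_combination hdecomp.symm + hcontra)
    exact h3 ⟨hu.1.symm, hu.2.symm⟩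
  · rintro ⟨xi, yi, xj, yj, h1, h2, h3, h4, h5, h6, h7, h8, h9, h10, h11, h12, h13⟩
    obtain ⟨hux, huy⟩ := pv_index_unique w xi yi (PySem.Int.mod i w) (PySem.Int.floordiv i w)
      h1 h2 hx0 hxw (by linear_combination h9.symm + hdecomp)
    refine ⟨(xj, yj), ?_, by dsimp only; linear_combination h10⟩
    rw [pv_mem_nbrA]
    dsimp only
    refine ⟨by omega, by omega, ?_, h5, h6, h7, h8⟩
    rintro ⟨hxx, hyy⟩
    have hx2 : xj = xi := by omega
    have hy2 : yj = yi := by omega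
    exact h13 (by rw [h9, h10, hx2, hy2])

theorem pv_mem_nbrB (w h i : Int) (hw : 0 < w) (hh : 0 < h) (hi0 : 0 ≤ i) (hilt : i < w * h)
    (j : Int) : j ∈ pvD_nbr_idxs i w h ↔ pvAdj w h i j := by
  obtain ⟨hx0, hxw, hy0, hyh, hdecomp⟩ := pv_coords w h i hw hh hi0 hilt
  unfold pvD_nbr_idxs
  simp only [List.mem_map, List.mem_filter, decide_eq_true_eq]
  constructor
  · rintro ⟨⟨dx, dy⟩, ⟨hmem, hbnd⟩, rfl⟩
    rw [pv_mem_offsets] at hmem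
    dsimp only at hmem hbnd ⊢
    obtain ⟨ha, hb, hne⟩ := hmem
    refine ⟨PySem.Int.mod i w, PySem.Int.floordiv i w,
      PySem.Int.mod i w + dx, PySem.Int.floordiv i w + dy, hx0, hxw, hy0, hyh,
      hbnd.1, hbnd.2.1, hbnd.2.2.1, hbnd.2.2.2, hdecomp, by ring, by omega, by omega, ?_⟩
    intro hcontra
    have hu := pv_index_unique w (PySem.Int.mod i w) (PySem.Int.floordiv i w)
      (PySem.Int.mod i w + dx) (PySem.Int.floordiv i w + dy) hx0 hxw hbnd.1 hbnd.2.1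
      (by linear_combination hdecomp.symm + hcontra)
    exact hne ⟨by omega, by omega⟩
  · rintro ⟨xi, yi, xj, yj, h1, h2, h3, h4, h5, h6, h7, h8, h9, h10, h11, h12, h13⟩
    obtain ⟨hux, huy⟩ := pv_index_unique w xi yi (PySem.Int.mod i w) (PySem.Int.floordiv i w)
      h1 h2 hx0 hxw (by linear_combination h9.symm + hdecomp)
    refine ⟨(xj - xi, yj - yi), ⟨?_, ?_⟩, ?_⟩
    · rw [pv_mem_offsets]
      dsimp only
      refine ⟨by omega, by omega, ?_⟩
      rintro ⟨hxx, hyy⟩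
      have hxj : xj = xi := by omega
      have hyj : yj = yi := by omega
      exact h13 (by rw [h9, h10, hxj, hyj])
    · dsimp only
      refine ⟨by omega, by omega, by omega, by omega⟩
    · dsimp only
      rw [← hux, ← huy]
      linear_combination -h10

theorem pv_or_fold (l : List Int) (f : Int → Bool) (s : Bool) :
    l.foldl (fun s e => s || f e) s = (s || l.any f) := by
  induction l generalizing s with
  | nil => simp
  | cons a t ih =>
    rw [List.foldl_cons, ih, List.any_cons]
    cases s <;> cases f a <;> simp

theorem pvD_solid_nbr_iff (i w h : Int) (sm : List Bool) (want : Bool) :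
    pvD_solid_nbr i w h sm want = true ↔
      ∃ dx dy : Int, dx.natAbs ≤ 1 ∧ dy.natAbs ≤ 1 ∧ ¬(dx = 0 ∧ dy = 0) ∧
        want = (decide (dx ≠ 0) && decide (dy ≠ 0)) ∧
        (0 ≤ PySem.Int.mod i w + dx ∧ PySem.Int.mod i w + dx < w ∧
         0 ≤ PySem.Int.floordiv i w + dy ∧ PySem.Int.floordiv i w + dy < h) ∧
        PySem.List.pyGetD sm
          ((PySem.Int.floordiv i w + dy) * w + (PySem.Int.mod i w + dx)) false = true := by
  unfold pvD_solid_nbr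
  rw [List.any_filter, List.any_eq_true]
  constructor
  · rintro ⟨⟨dx, dy⟩, hmem, hp⟩
    rw [pv_mem_offsets] at hmem
    simp only [Bool.and_eq_true, beq_iff_eq, decide_eq_true_eq] at hp
    exact ⟨dx, dy, hmem.1, hmem.2.1, hmem.2.2, hp.1.1, hp.1.2, hp.2⟩
  · rintro ⟨dx, dy, h1, h2, h3, h4, h5, h6⟩
    refine ⟨(dx, dy), ?_, ?_⟩
    · rw [pv_mem_offsets]; exact ⟨h1, h2, h3⟩
    · simp only [Bool.and_eq_true, beq_iff_eq, decide_eq_true_eq]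
      exact ⟨⟨h4, h5⟩, h6⟩

theorem pv_diag_eq (idx w h : Int) (sm : List Bool) :
    pvA_solid_neighbors_diagonal_only idx w h sm =
      (pvD_solid_nbr idx w h sm true && !(pvD_solid_nbr idx w h sm false)) := by
  unfold pvA_solid_neighbors_diagonal_only
  dsimp only
  set O : Int → Int → Bool := fun dx dy => decide (¬(dx = 0 ∧ dy = 0) ∧
    (0 ≤ PySem.Int.mod idx w + dx ∧ PySem.Int.mod idx w + dx < w ∧
     0 ≤ PySem.Int.floordiv idx w + dy ∧ PySem.Int.floordiv idx w + dy < h) ∧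
    PySem.List.pyGetD sm ((PySem.Int.floordiv idx w + dy) * w + (PySem.Int.mod idx w + dx)) false = true ∧
    (dx = 0 ∨ dy = 0)) with hO
  set G : Int → Int → Bool := fun dx dy => decide (¬(dx = 0 ∧ dy = 0) ∧
    (0 ≤ PySem.Int.mod idx w + dx ∧ PySem.Int.mod idx w + dx < w ∧
     0 ≤ PySem.Int.floordiv idx w + dy ∧ PySem.Int.floordiv idx w + dy < h) ∧
    PySem.List.pyGetD sm ((PySem.Int.floordiv idx w + dy) * w + (PySem.Int.mod idx w + dx)) false = true ∧
    ¬(dx = 0 ∨ dy = 0)) with hG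
  have hinner : ∀ (dx : Int) (st : Bool × Bool),
      List.foldl (fun (st : Bool × Bool) dy =>
        if dx = 0 ∧ dy = 0 then st
        else
          if (0 ≤ PySem.Int.mod idx w + dx ∧ PySem.Int.mod idx w + dx < w ∧
              0 ≤ PySem.Int.floordiv idx w + dy ∧ PySem.Int.floordiv idx w + dy < h) ∧
              PySem.List.pyGetD sm
                ((PySem.Int.floordiv idx w + dy) * w + (PySem.Int.mod idx w + dx)) false = true then
            if dx = 0 ∨ dy = 0 then (true, st.2) else (st.1, true)
          else st) st [(-1 : Int), 0, 1] =
      (st.1 || [(-1 : Int), 0, 1].any (O dx), st.2 || [(-1 : Int), 0, 1].any (G dx)) := by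
    intro dx st
    have h1 := PySem.List.foldl_congr_mem [(-1 : Int), 0, 1]
      (fun (st : Bool × Bool) dy =>
        if dx = 0 ∧ dy = 0 then st
        else
          if (0 ≤ PySem.Int.mod idx w + dx ∧ PySem.Int.mod idx w + dx < w ∧
              0 ≤ PySem.Int.floordiv idx w + dy ∧ PySem.Int.floordiv idx w + dy < h) ∧
              PySem.List.pyGetD sm
                ((PySem.Int.floordiv idx w + dy) * w + (PySem.Int.mod idx w + dx)) false = true then
            if dx = 0 ∨ dy = 0 then (true, st.2) else (st.1, true)
          else st)
      (fun (st : Bool × Bool) dy => (st.1 || O dx dy, st.2 || G dx dy)) st ?_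
    · rw [h1]
      rcases st with ⟨s1, s2⟩
      rw [PySem.List.foldl_prod_mk (f := fun s e => s || O dx e) (g := fun s e => s || G dx e)]
      rw [pv_or_fold, pv_or_fold]
    · intro acc dy _
      beta_reduce
      by_cases h1 : dx = 0 ∧ dy = 0
      · have o : O dx dy = false := by rw [hO]; simp only [decide_eq_false_iff_not]; tauto
        have g : G dx dy = false := by rw [hG]; simp only [decide_eq_false_iff_not]; tauto
        rw [if_pos h1, o, g]; simp
      · by_cases h2 : (0 ≤ PySem.Int.mod idx w + dx ∧ PySem.Int.mod idx w + dx < w ∧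
            0 ≤ PySem.Int.floordiv idx w + dy ∧ PySem.Int.floordiv idx w + dy < h) ∧
            PySem.List.pyGetD sm
              ((PySem.Int.floordiv idx w + dy) * w + (PySem.Int.mod idx w + dx)) false = true
        · by_cases h3 : dx = 0 ∨ dy = 0
          · have o : O dx dy = true := by rw [hO]; simp only [decide_eq_true_eq]; tauto
            have g : G dx dy = false := by rw [hG]; simp only [decide_eq_false_iff_not]; tauto
            rw [if_neg h1, if_pos h2, if_pos h3, o, g]; simp
          · have o : O dx dy = false := by rw [hO]; simp only [decide_eq_false_iff_not]; tauto
            have g : G dx dy = true := by rw [hG]; simp only [decide_eq_true_eq]; tauto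
            rw [if_neg h1, if_pos h2, if_neg h3, o, g]; simp
        · have o : O dx dy = false := by rw [hO]; simp only [decide_eq_false_iff_not]; tauto
          have g : G dx dy = false := by rw [hG]; simp only [decide_eq_false_iff_not]; tauto
          rw [if_neg h1, if_neg h2, o, g]; simp
  have houter := PySem.List.foldl_congr_mem [(-1 : Int), 0, 1]
    (fun (st : Bool × Bool) dx =>
      List.foldl (fun (st : Bool × Bool) dy =>
        if dx = 0 ∧ dy = 0 then st
        else
          if (0 ≤ PySem.Int.mod idx w + dx ∧ PySem.Int.mod idx w + dx < w ∧
              0 ≤ PySem.Int.floordiv idx w + dy ∧ PySem.Int.floordiv idx w + dy < h) ∧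
              PySem.List.pyGetD sm
                ((PySem.Int.floordiv idx w + dy) * w + (PySem.Int.mod idx w + dx)) false = true then
            if dx = 0 ∨ dy = 0 then (true, st.2) else (st.1, true)
          else st) st [(-1 : Int), 0, 1])
    (fun (st : Bool × Bool) dx => (st.1 || [(-1 : Int), 0, 1].any (O dx),
      st.2 || [(-1 : Int), 0, 1].any (G dx))) ((false, false) : Bool × Bool)
    (fun acc dx _ => hinner dx acc)
  rw [houter]
  rw [PySem.List.foldl_prod_mk (f := fun s dx => s || [(-1 : Int), 0, 1].any (O dx))
    (g := fun s dx => s || [(-1 : Int), 0, 1].any (G dx))]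
  rw [pv_or_fold, pv_or_fold]
  simp only [Bool.false_or]
  congr 1
  · rw [Bool.eq_iff_iff, pvD_solid_nbr_iff]
    rw [List.any_eq_true]
    constructor
    · rintro ⟨dx, hdx, hany⟩
      rw [List.any_eq_true] at hany
      obtain ⟨dy, hdy, hg⟩ := hany
      rw [hG, decide_eq_true_eq] at hg
      simp only [List.mem_cons, List.not_mem_nil, or_false] at hdx hdy
      refine ⟨dx, dy, by omega, by omega, by tauto, ?_, hg.2.1, hg.2.2.1⟩
      have hxne : ¬ dx = 0 ∨ ¬ dy = 0 := by tauto
      have hdir := hg.2.2.2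
      rw [eq_comm, Bool.and_eq_true, decide_eq_true_eq, decide_eq_true_eq]
      tauto
    · rintro ⟨dx, dy, h1, h2, h3, h4, h5, h6⟩
      rw [eq_comm, Bool.and_eq_true, decide_eq_true_eq, decide_eq_true_eq] at h4
      refine ⟨dx, by simp only [List.mem_cons, List.not_mem_nil, or_false]; omega, ?_⟩
      rw [List.any_eq_true]
      refine ⟨dy, by simp only [List.mem_cons, List.not_mem_nil, or_false]; omega, ?_⟩
      rw [hG, decide_eq_true_eq]
      exact ⟨h3, h5, h6, by tauto⟩
  · congr 1
    rw [Bool.eq_iff_iff, pvD_solid_nbr_iff]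
    rw [List.any_eq_true]
    constructor
    · rintro ⟨dx, hdx, hany⟩
      rw [List.any_eq_true] at hany
      obtain ⟨dy, hdy, hg⟩ := hany
      rw [hO, decide_eq_true_eq] at hg
      simp only [List.mem_cons, List.not_mem_nil, or_false] at hdx hdy
      refine ⟨dx, dy, by omega, by omega, by tauto, ?_, hg.2.1, hg.2.2.1⟩
      have hdir := hg.2.2.2
      rw [eq_comm, Bool.eq_false_iff, ne_eq, Bool.and_eq_true, decide_eq_true_eq, decide_eq_true_eq]
      tauto
    · rintro ⟨dx, dy, h1, h2, h3, h4, h5, h6⟩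
      rw [eq_comm, Bool.eq_false_iff, ne_eq, Bool.and_eq_true, decide_eq_true_eq,
        decide_eq_true_eq] at h4
      refine ⟨dx, by simp only [List.mem_cons, List.not_mem_nil, or_false]; omega, ?_⟩
      rw [List.any_eq_true]
      refine ⟨dy, by simp only [List.mem_cons, List.not_mem_nil, or_false]; omega, ?_⟩
      rw [hO, decide_eq_true_eq]
      exact ⟨h3, h5, h6, by tauto⟩

theorem pv_initA_inner (w h : Int) (sm : List Bool) (N : Nat) (hN : N = (w * h).toNat)
    (hw : 0 < w) (hh : 0 < h) (y : Int) (hy0 : 0 ≤ y) (hyh : y < h) :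
    ∀ (m : Nat), (m : Int) ≤ w → ∀ (dist : List Int), dist.length = N →
      (((List.range m).map (fun k => ((k : Nat) : Int))).foldl (fun dist x =>
          if PySem.List.pyGetD sm (y * w + x) false = true then
            PySem.List.pySetD dist (y * w + x) 0 else dist) dist).length = N ∧
      (∀ j : Int, 0 ≤ j →
        PySem.List.pyGetD (((List.range m).map (fun k => ((k : Nat) : Int))).foldl (fun dist x =>
            if PySem.List.pyGetD sm (y * w + x) false = true then
              PySem.List.pySetD dist (y * w + x) 0 else dist) dist) j 0 =
          if y * w ≤ j ∧ j < y * w + (m : Int) ∧ PySem.List.pyGetD sm j false = true then 0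
          else PySem.List.pyGetD dist j 0) := by
  intro m
  induction m with
  | zero =>
    intro _ dist hlen
    refine ⟨by simpa using hlen, ?_⟩
    intro j hj0
    rw [if_neg (by omega)]
    simp
  | succ m ih =>
    intro hm dist hlen
    obtain ⟨ihlen, ihval⟩ := ih (by omega) dist hlen
    rw [List.range_succ, List.map_append, List.foldl_append]
    simp only [List.map_cons, List.map_nil, List.foldl_cons, List.foldl_nil]
    have hidx0 : 0 ≤ y * w + (m : Int) := by positivity
    have hidxN : y * w + (m : Int) < (N : Int) := by
      have hmw : (m : Int) < w := by exact_mod_cast hm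
      have hpos : (0:Int) < w * h := by positivity
      have hNint : (N : Int) = w * h := by omega
      have k1 : y * w ≤ (h - 1) * w := mul_le_mul_of_nonneg_right (by omega) (by omega)
      have k2 : (h - 1) * w = h * w - w := by ring
      have k3 : w * h = h * w := mul_comm w h
      omega
    constructor
    · split
      · rw [PySem.List.length_pySetD, ihlen]
      · exact ihlen
    · intro j hj0
      by_cases hs : PySem.List.pyGetD sm (y * w + (m : Int)) false = true
      · rw [if_pos hs]
        rw [pv_getD_set _ _ _ _ _ hidx0 (by rw [ihlen]; omega) hj0, ihval j hj0]
        by_cases hj : j = y * w + (m : Int)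
        · subst hj
          rw [if_pos rfl, if_pos ⟨by omega, by omega, hs⟩]
        · rw [if_neg hj]
          by_cases hc : y * w ≤ j ∧ j < y * w + (m : Int) ∧ PySem.List.pyGetD sm j false = true
          · rw [if_pos hc, if_pos ⟨hc.1, by omega, hc.2.2⟩]
          · rw [if_neg hc, if_neg (by rintro ⟨a, b, c⟩; exact hc ⟨a, by omega, c⟩)]
      · rw [if_neg hs, ihval j hj0]
        by_cases hc : y * w ≤ j ∧ j < y * w + (m : Int) ∧ PySem.List.pyGetD sm j false = true
        · rw [if_pos hc, if_pos ⟨hc.1, by omega, hc.2.2⟩]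
        · rw [if_neg hc]
          rw [if_neg ?_]
          rintro ⟨a, b, c⟩
          by_cases hj : j = y * w + (m : Int)
          · subst hj; exact hs c
          · exact hc ⟨a, by omega, c⟩

theorem pv_initA_outer (w h : Int) (sm : List Bool) (N : Nat) (hN : N = (w * h).toNat)
    (hw : 0 < w) (hh : 0 < h) :
    ∀ (m : Nat), (m : Int) ≤ h → ∀ (dist : List Int), dist.length = N →
      (((List.range m).map (fun k => ((k : Nat) : Int))).foldl (fun dist y =>
          (PySem.List.pyRange 0 w 1).foldl (fun dist x =>
            if PySem.List.pyGetD sm (y * w + x) false = true then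
              PySem.List.pySetD dist (y * w + x) 0 else dist) dist) dist).length = N ∧
      (∀ j : Int, 0 ≤ j →
        PySem.List.pyGetD (((List.range m).map (fun k => ((k : Nat) : Int))).foldl (fun dist y =>
            (PySem.List.pyRange 0 w 1).foldl (fun dist x =>
              if PySem.List.pyGetD sm (y * w + x) false = true then
                PySem.List.pySetD dist (y * w + x) 0 else dist) dist) dist) j 0 =
          if j < (m : Int) * w ∧ PySem.List.pyGetD sm j false = true then 0
          else PySem.List.pyGetD dist j 0) := by
  intro m
  induction m with
  | zero =>
    intro _ dist hlen
    refine ⟨by simpa using hlen, ?_⟩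
    intro j hj0
    rw [if_neg (by intro hc; have := hc.1; omega)]
    simp
  | succ m ih =>
    intro hm dist hlen
    obtain ⟨ihlen, ihval⟩ := ih (by omega) dist hlen
    rw [List.range_succ, List.map_append, List.foldl_append]
    simp only [List.map_cons, List.map_nil, List.foldl_cons, List.foldl_nil]
    rw [PySem.List.pyRange_zero] at ihlen ihval ⊢
    have hrow := pv_initA_inner w h sm N hN hw hh (m : Int) (by omega) (by exact_mod_cast hm)
      w.toNat (by omega) _ ihlen
    obtain ⟨rlen, rval⟩ := hrow
    refine ⟨rlen, ?_⟩
    intro j hj0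
    rw [rval j hj0, ihval j hj0]
    have hww : ((w.toNat : Nat) : Int) = w := by omega
    by_cases hc : (m : Int) * w ≤ j ∧ j < (m : Int) * w + w ∧ PySem.List.pyGetD sm j false = true
    · rw [if_pos (by rw [hww]; exact hc)]
      rw [if_pos ?_]
      push_cast
      have : ((m : Int) + 1) * w = (m : Int) * w + w := by ring
      exact ⟨by omega, hc.2.2⟩
    · rw [if_neg (by rw [hww]; exact hc)]
      by_cases hd : j < (m : Int) * w ∧ PySem.List.pyGetD sm j false = true
      · rw [if_pos hd, if_pos ?_]
        push_cast
        have : ((m : Int) + 1) * w = (m : Int) * w + w := by ring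
        exact ⟨by omega, hd.2⟩
      · rw [if_neg hd, if_neg ?_]
        push_cast
        have hmul : ((m : Int) + 1) * w = (m : Int) * w + w := by ring
        rintro ⟨a, b⟩
        rcases lt_or_ge j ((m : Int) * w) with hlt | hge
        · exact hd ⟨hlt, b⟩
        · exact hc ⟨hge, by omega, b⟩

theorem pv_nf_add (w h idx : Int) (sm : List Bool) (dist' : List Int) (nf : PySem.Set Int)
    (hw : 0 < w) (hh : 0 < h) (hi0 : 0 ≤ idx) (hilt : idx < w * h) :
    (∀ j : Int,
      j ∈ (pvA_get_neighbors (PySem.Int.mod idx w) (PySem.Int.floordiv idx w) w h).foldl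
        (fun nf p =>
          if PySem.List.pyGetD sm (p.2 * w + p.1) false = false ∧
              PySem.List.pyGetD dist' (p.2 * w + p.1) 0 = (1 : Int) <<< 30 then
            PySem.Set.add nf (p.2 * w + p.1)
          else nf) nf ↔
      (j ∈ nf ∨ (pvAdj w h idx j ∧ PySem.List.pyGetD sm j false = false ∧ PySem.List.pyGetD dist' j 0 = pvINF))) ∧
    (nf.Nodup →
      ((pvA_get_neighbors (PySem.Int.mod idx w) (PySem.Int.floordiv idx w) w h).foldl
        (fun nf p =>
          if PySem.List.pyGetD sm (p.2 * w + p.1) false = false ∧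
              PySem.List.pyGetD dist' (p.2 * w + p.1) 0 = (1 : Int) <<< 30 then
            PySem.Set.add nf (p.2 * w + p.1)
          else nf) nf).Nodup) := by
  have heq := PySem.List.foldl_ite_eq_foldl_filter
    (fun (p : Int × Int) => PySem.List.pyGetD sm (p.2 * w + p.1) false = false ∧
      PySem.List.pyGetD dist' (p.2 * w + p.1) 0 = (1 : Int) <<< 30)
    (fun (nf : PySem.Set Int) (p : Int × Int) => PySem.Set.add nf (p.2 * w + p.1))
    (pvA_get_neighbors (PySem.Int.mod idx w) (PySem.Int.floordiv idx w) w h) nf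
  rw [heq]
  constructor
  · intro j
    rw [PySem.Set.mem_foldl_add]
    constructor
    · rintro (hj | ⟨p, hp, rfl⟩)
      · exact Or.inl hj
      · rw [List.mem_filter, decide_eq_true_eq] at hp
        refine Or.inr ⟨?_, hp.2.1, hp.2.2⟩
        exact (pv_nbrA_idx w h idx _ hw hh hi0 hilt).mp ⟨p, hp.1, rfl⟩
    · rintro (hj | ⟨hadj, hsm, hV⟩)
      · exact Or.inl hj
      · obtain ⟨p, hp, rfl⟩ := (pv_nbrA_idx w h idx j hw hh hi0 hilt).mpr hadj
        refine Or.inr ⟨p, ?_, rfl⟩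
        rw [List.mem_filter, decide_eq_true_eq]
        exact ⟨hp, hsm, hV⟩
  · intro hnd
    rw [← PySem.Set.update_map_eq_foldl_add]
    exact PySem.Set.nodup_update _ _ hnd

def pvFrontP (w h : Int) (Δ : List Int) (e j : Int) : Prop :=
  0 ≤ j ∧ j < w * h ∧ PySem.List.pyGetD Δ j 0 = pvINF ∧
  ∃ i, pvAdj w h j i ∧ PySem.List.pyGetD Δ i 0 = e

theorem pv_round (w h d : Int) (sm : List Bool) (Δ : List Int)
    (hw : 0 < w) (hh : 0 < h) (hd1 : 1 ≤ d) (hdINF : d < pvINF)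
    (hΔlen : Δ.length = (w * h).toNat)
    (l : List Int) :
    ∀ (p : List Int) (dist : List Int) (nf : PySem.Set Int),
    l.Nodup → (∀ x ∈ l, x ∉ p) →
    (∀ x ∈ l, pvFrontP w h Δ (d - 1) x ∨
      (0 ≤ x ∧ x < w * h ∧ PySem.List.pyGetD Δ x 0 = d - 1)) →
    dist.length = Δ.length →
    (∀ i : Int, 0 ≤ i →
      ((i ∈ p ∧ pvFrontP w h Δ (d - 1) i) → PySem.List.pyGetD dist i 0 = d) ∧
      (¬ (i ∈ p ∧ pvFrontP w h Δ (d - 1) i) →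
        PySem.List.pyGetD dist i 0 = PySem.List.pyGetD Δ i 0)) →
    nf.Nodup →
    (∀ j ∈ nf, 0 ≤ j ∧ j < w * h ∧ PySem.List.pyGetD Δ j 0 = pvINF ∧
      ∃ i ∈ p, pvFrontP w h Δ (d - 1) i ∧ pvAdj w h i j) →
    (∀ i ∈ p, pvFrontP w h Δ (d - 1) i → ∀ j, pvAdj w h i j →
      PySem.List.pyGetD sm j false = false → PySem.List.pyGetD Δ j 0 = pvINF →
      (j ∈ nf ∨ (j ∈ p ∧ pvFrontP w h Δ (d - 1) j))) →
    ∀ (dist2 : List Int) (nf2 : PySem.Set Int),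
    (dist2, nf2) = l.foldl (fun (st : List Int × PySem.Set Int) idx =>
      if PySem.List.pyGetD st.1 idx 0 > d then
        (PySem.List.pySetD st.1 idx d,
         (pvA_get_neighbors (PySem.Int.mod idx w) (PySem.Int.floordiv idx w) w h).foldl (fun nf p =>
          if PySem.List.pyGetD sm (p.2 * w + p.1) false = false ∧
              PySem.List.pyGetD (PySem.List.pySetD st.1 idx d) (p.2 * w + p.1) 0 = (1 : Int) <<< 30 then
            PySem.Set.add nf (p.2 * w + p.1)
          else nf) st.2)
      else st) (dist, nf) →
    (dist2.length = Δ.length ∧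
    (∀ i : Int, 0 ≤ i →
      ((i ∈ (p ++ l) ∧ pvFrontP w h Δ (d - 1) i) → PySem.List.pyGetD dist2 i 0 = d) ∧
      (¬ (i ∈ (p ++ l) ∧ pvFrontP w h Δ (d - 1) i) →
        PySem.List.pyGetD dist2 i 0 = PySem.List.pyGetD Δ i 0)) ∧
    nf2.Nodup ∧
    (∀ j ∈ nf2, 0 ≤ j ∧ j < w * h ∧ PySem.List.pyGetD Δ j 0 = pvINF ∧
      ∃ i ∈ p ++ l, pvFrontP w h Δ (d - 1) i ∧ pvAdj w h i j) ∧
    (∀ i ∈ p ++ l, pvFrontP w h Δ (d - 1) i → ∀ j, pvAdj w h i j →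
      PySem.List.pyGetD sm j false = false → PySem.List.pyGetD Δ j 0 = pvINF →
      (j ∈ nf2 ∨ (j ∈ p ++ l ∧ pvFrontP w h Δ (d - 1) j)))) := by
  induction l with
  | nil =>
    intro p dist nf _ _ _ hdl hdv hnfnd hnfup hnflo dist2 nf2 heq
    rw [List.foldl_nil] at heq
    obtain ⟨rfl, rfl⟩ : dist2 = dist ∧ nf2 = nf := by
      exact ⟨congrArg Prod.fst heq, congrArg Prod.snd heq⟩
    simp only [List.append_nil]
    exact ⟨hdl, hdv, hnfnd, hnfup, hnflo⟩
  | cons c t ih =>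
    intro p dist nf hnd hdisj hsub hdl hdv hnfnd hnfup hnflo dist2 nf2 heq
    have hmemc : c ∈ c :: t := by simp
    have hcp : c ∉ p := hdisj c hmemc
    have hc0 : 0 ≤ c := by
      rcases hsub c hmemc with hF | hJ
      · exact hF.1
      · exact hJ.1
    have hcN : c < w * h := by
      rcases hsub c hmemc with hF | hJ
      · exact hF.2.1
      · exact hJ.2.1
    have hvc : PySem.List.pyGetD dist c 0 = PySem.List.pyGetD Δ c 0 :=
      (hdv c hc0).2 (by rintro ⟨hmem, _⟩; exact hcp hmem)
    rw [List.foldl_cons] at heq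
    dsimp only at heq
    rw [List.append_cons]
    rcases hsub c hmemc with hF | hJ
    · -- frontier pixel: assigned d, then expanded
      have hcond : PySem.List.pyGetD dist c 0 > d := by
        rw [hvc, hF.2.2.1, pvINF_val]
        rw [pvINF_val] at hdINF
        omega
      rw [if_pos hcond] at heq
      have hdl' : (PySem.List.pySetD dist c d).length = Δ.length := by
        rw [PySem.List.length_pySetD, hdl]
      have hdv' : ∀ i : Int, 0 ≤ i →
          ((i ∈ (p ++ [c]) ∧ pvFrontP w h Δ (d - 1) i) →
            PySem.List.pyGetD (PySem.List.pySetD dist c d) i 0 = d) ∧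
          (¬ (i ∈ (p ++ [c]) ∧ pvFrontP w h Δ (d - 1) i) →
            PySem.List.pyGetD (PySem.List.pySetD dist c d) i 0 = PySem.List.pyGetD Δ i 0) := by
        intro i hi0
        rw [pv_getD_set _ _ _ _ _ hc0 (by rw [hdl, hΔlen]; omega) hi0]
        by_cases hic : i = c
        · subst hic
          rw [if_pos rfl]
          exact ⟨fun _ => rfl, fun hn => absurd ⟨by simp, hF⟩ hn⟩
        · rw [if_neg hic]
          have hiff : (i ∈ p ++ [c]) ↔ i ∈ p := by simp [List.mem_append, hic]
          constructor
          · rintro ⟨hm, hf⟩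
            exact (hdv i hi0).1 ⟨hiff.mp hm, hf⟩
          · intro hn
            exact (hdv i hi0).2 (by rintro ⟨hm, hf⟩; exact hn ⟨hiff.mpr hm, hf⟩)
      obtain ⟨hmem_nf', hnodup_nf'⟩ :=
        pv_nf_add w h c sm (PySem.List.pySetD dist c d) nf hw hh hc0 hcN
      have hVset : ∀ j : Int, 0 ≤ j →
          (PySem.List.pyGetD (PySem.List.pySetD dist c d) j 0 = pvINF ↔
            (¬ (j ∈ (p ++ [c]) ∧ pvFrontP w h Δ (d - 1) j) ∧
              PySem.List.pyGetD Δ j 0 = pvINF)) := by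
        intro j hj0
        by_cases hcnd : j ∈ (p ++ [c]) ∧ pvFrontP w h Δ (d - 1) j
        · rw [(hdv' j hj0).1 hcnd]
          rw [pvINF_val] at hdINF ⊢
          constructor
          · intro hdd; omega
          · rintro ⟨hno, _⟩; exact absurd hcnd hno
        · rw [(hdv' j hj0).2 hcnd]; tauto
      refine ih (p ++ [c]) (PySem.List.pySetD dist c d) ((pvA_get_neighbors (PySem.Int.mod c w) (PySem.Int.floordiv c w) w h).foldl (fun nf p =>
          if PySem.List.pyGetD sm (p.2 * w + p.1) false = false ∧
              PySem.List.pyGetD (PySem.List.pySetD dist c d) (p.2 * w + p.1) 0 = (1 : Int) <<< 30 then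
            PySem.Set.add nf (p.2 * w + p.1)
          else nf) nf)
        (List.nodup_cons.mp hnd).2 ?_ (fun x hx => hsub x (List.mem_cons_of_mem c hx))
        hdl' hdv' (hnodup_nf' hnfnd) ?_ ?_ dist2 nf2 heq
      · intro x hx
        simp only [List.mem_append, List.mem_singleton]
        rintro (hxp | rfl)
        · exact hdisj x (List.mem_cons_of_mem c hx) hxp
        · exact (List.nodup_cons.mp hnd).1 hx
      · intro j hj
        rw [hmem_nf'] at hj
        rcases hj with hj | ⟨hadj, hsm, hV⟩
        · obtain ⟨a1, a2, a3, i, hip, hf, ha⟩ := hnfup j hj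
          exact ⟨a1, a2, a3, i, by simp [List.mem_append, hip], hf, ha⟩
        · obtain ⟨-, -, hj0, hjN⟩ := pvAdj_range hadj
          have hVj : PySem.List.pyGetD Δ j 0 = pvINF := ((hVset j hj0).mp hV).2
          exact ⟨hj0, hjN, hVj, c, by simp, hF, hadj⟩
      · intro i hip hfi j hadj hsm hVj
        simp only [List.mem_append, List.mem_singleton] at hip
        rcases hip with hip | hic
        · rcases hnflo i hip hfi j hadj hsm hVj with hin | ⟨hjp, hjf⟩
          · left; rw [hmem_nf']; exact Or.inl hin
          · right; exact ⟨by simp [List.mem_append, hjp], hjf⟩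
        · rw [hic] at hadj
          obtain ⟨-, -, hj0, -⟩ := pvAdj_range hadj
          by_cases hjc : j ∈ (p ++ [c]) ∧ pvFrontP w h Δ (d - 1) j
          · right; exact hjc
          · left
            rw [hmem_nf']
            exact Or.inr ⟨hadj, hsm, (hVset j hj0).mpr ⟨hjc, hVj⟩⟩
    · -- junk pixel: skipped
      have hnotFc : ¬ pvFrontP w h Δ (d - 1) c := by
        intro hf
        have h1 := hf.2.2.1
        rw [hJ.2.2] at h1
        rw [pvINF_val] at h1 hdINF
        omega
      have hcond : ¬ (PySem.List.pyGetD dist c 0 > d) := by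
        rw [hvc, hJ.2.2]
        omega
      rw [if_neg hcond] at heq
      refine ih (p ++ [c]) dist nf
        (List.nodup_cons.mp hnd).2 ?_ (fun x hx => hsub x (List.mem_cons_of_mem c hx))
        hdl ?_ hnfnd ?_ ?_ dist2 nf2 heq
      · intro x hx
        simp only [List.mem_append, List.mem_singleton]
        rintro (hxp | rfl)
        · exact hdisj x (List.mem_cons_of_mem c hx) hxp
        · exact (List.nodup_cons.mp hnd).1 hx
      · intro i hi0
        have hiff : (i ∈ p ++ [c]) ∧ pvFrontP w h Δ (d - 1) i ↔
            (i ∈ p) ∧ pvFrontP w h Δ (d - 1) i := by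
          constructor
          · rintro ⟨hm, hf⟩
            simp only [List.mem_append, List.mem_singleton] at hm
            rcases hm with hm | rfl
            · exact ⟨hm, hf⟩
            · exact absurd hf hnotFc
          · rintro ⟨hm, hf⟩
            exact ⟨by simp [List.mem_append, hm], hf⟩
        constructor
        · intro hcnd
          exact (hdv i hi0).1 (hiff.mp hcnd)
        · intro hn
          exact (hdv i hi0).2 (fun hcnd => hn (hiff.mpr hcnd))
      · intro j hj
        obtain ⟨a1, a2, a3, i, hip, rest⟩ := hnfup j hj
        exact ⟨a1, a2, a3, i, by simp [List.mem_append, hip], rest⟩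
      · intro i hip hfi j hadj hsm hVj
        simp only [List.mem_append, List.mem_singleton] at hip
        rcases hip with hip | hic
        · rcases hnflo i hip hfi j hadj hsm hVj with hin | ⟨hjp, hjf⟩
          · exact Or.inl hin
          · exact Or.inr ⟨by simp [List.mem_append, hjp], hjf⟩
        · rw [hic] at hfi
          exact absurd hfi hnotFc

theorem pv_stepB_len (w h : Int) (dist : List Int) (d : Int) :
    (pvD_step w h dist d).length = dist.length := by
  simp [pvD_step, PySem.List.length_enumerate]

theorem pv_stepB_get (w h d : Int) (dist : List Int) (hw : 0 < w) (hh : 0 < h)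
    (hlen : dist.length = (w * h).toNat) (k : Nat) (hk : k < dist.length) :
    ((PySem.List.pyGetD dist (k : Int) 0 ≠ pvINF →
      (pvD_step w h dist d)[k]'(by rw [pv_stepB_len]; exact hk) = PySem.List.pyGetD dist (k : Int) 0) ∧
     (PySem.List.pyGetD dist (k : Int) 0 = pvINF →
      ((∃ j, pvAdj w h (k : Int) j ∧ PySem.List.pyGetD dist j 0 = d - 1) →
        (pvD_step w h dist d)[k]'(by rw [pv_stepB_len]; exact hk) = d) ∧
      ((¬ ∃ j, pvAdj w h (k : Int) j ∧ PySem.List.pyGetD dist j 0 = d - 1) →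
        (pvD_step w h dist d)[k]'(by rw [pv_stepB_len]; exact hk) = pvINF))) := by
  have hk0 : (0 : Int) ≤ (k : Int) := by omega
  have hkN : (k : Int) < w * h := by
    have : (0:Int) ≤ w * h := by positivity
    omega
  have hgetm : (pvD_step w h dist d)[k]'(by rw [pv_stepB_len]; exact hk) =
      (fun (p : Int × Int) =>
        if p.2 ≠ (1 : Int) <<< 30 then p.2
        else if (pvD_nbr_idxs p.1 w h).any
            (fun j => PySem.List.pyGetD dist j 0 == d - 1) then d
        else (1 : Int) <<< 30) ((0 : Int) + (k : Int), dist[k]) := by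
    unfold pvD_step
    rw [List.getElem_map]
    rw [PySem.List.getElem_enumerate dist 0 k (by rw [PySem.List.length_enumerate]; exact hk)]
  rw [hgetm]
  have hval : dist[k] = PySem.List.pyGetD dist (k : Int) 0 := (pv_getD_eq_getElem dist k hk).symm
  dsimp only
  rw [hval]
  have hzk : (0 : Int) + (k : Int) = (k : Int) := by omega
  rw [hzk]
  have hany : ((pvD_nbr_idxs (k : Int) w h).any
      (fun j => PySem.List.pyGetD dist j 0 == d - 1) = true) ↔
      (∃ j, pvAdj w h (k : Int) j ∧ PySem.List.pyGetD dist j 0 = d - 1) := by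
    rw [List.any_eq_true]
    constructor
    · rintro ⟨j, hj, hbeq⟩
      exact ⟨j, (pv_mem_nbrB w h (k : Int) hw hh hk0 hkN j).mp hj, by simpa using hbeq⟩
    · rintro ⟨j, hadj, hv⟩
      exact ⟨j, (pv_mem_nbrB w h (k : Int) hw hh hk0 hkN j).mpr hadj, by simpa using hv⟩
  constructor
  · intro hne
    rw [if_pos (show PySem.List.pyGetD dist (k : Int) 0 ≠ (1 : Int) <<< 30 from hne)]
  · intro hinf
    rw [if_neg (show ¬ (PySem.List.pyGetD dist (k : Int) 0 ≠ (1 : Int) <<< 30) from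
      not_not_intro (by rw [show ((1 : Int) <<< 30) = pvINF from rfl]; exact hinf))]
    constructor
    · intro hex
      rw [if_pos (hany.mpr hex)]
    · intro hnex
      rw [if_neg (by rw [hany]; exact hnex)]
      rfl

theorem pv_stepB_id_INF (w h d : Int) (dist : List Int) (hw : 0 < w) (hh : 0 < h)
    (hlen : dist.length = (w * h).toNat) (hd : d = pvINF) :
    pvD_step w h dist d = dist := by
  apply List.ext_getElem (by rw [pv_stepB_len])
  intro k h1 h2
  obtain ⟨c1, c2⟩ := pv_stepB_get w h d dist hw hh hlen k h2
  by_cases hinf : PySem.List.pyGetD dist (k : Int) 0 = pvINF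
  · obtain ⟨c21, c22⟩ := c2 hinf
    by_cases hex : ∃ j, pvAdj w h (k : Int) j ∧ PySem.List.pyGetD dist j 0 = d - 1
    · rw [c21 hex, hd, ← hinf, pv_getD_eq_getElem dist k h2]
    · rw [c22 hex, ← hinf, pv_getD_eq_getElem dist k h2]
  · rw [c1 hinf, pv_getD_eq_getElem dist k h2]

theorem pv_stepB_id_noFront (w h d : Int) (dist : List Int) (hw : 0 < w) (hh : 0 < h)
    (hlen : dist.length = (w * h).toNat)
    (hno : ∀ j, ¬ pvFrontP w h dist (d - 1) j) :
    pvD_step w h dist d = dist := by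
  apply List.ext_getElem (by rw [pv_stepB_len])
  intro k h1 h2
  obtain ⟨c1, c2⟩ := pv_stepB_get w h d dist hw hh hlen k h2
  by_cases hinf : PySem.List.pyGetD dist (k : Int) 0 = pvINF
  · obtain ⟨c21, c22⟩ := c2 hinf
    have hge : (0:Int) ≤ w * h := by positivity
    have hcast : (((w * h).toNat : Nat) : Int) = w * h := Int.toNat_of_nonneg hge
    have hkN : (k : Int) < w * h := by
      rw [← hcast]
      exact_mod_cast (hlen ▸ h2)
    have hnex : ¬ ∃ j, pvAdj w h (k : Int) j ∧ PySem.List.pyGetD dist j 0 = d - 1 := by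
      rintro ⟨j, hadj, hv⟩
      exact hno (k : Int) ⟨by omega, hkN, hinf, j, hadj, hv⟩
    rw [c22 hnex, ← hinf, pv_getD_eq_getElem dist k h2]
  · rw [c1 hinf, pv_getD_eq_getElem dist k h2]

theorem pv_skip_all (w h d : Int) (sm : List Bool) :
    ∀ (l : List Int) (dist : List Int) (nf : PySem.Set Int),
    (∀ x ∈ l, 0 ≤ x ∧ PySem.List.pyGetD dist x 0 ≤ d) →
    l.foldl (fun (st : List Int × PySem.Set Int) idx =>
      if PySem.List.pyGetD st.1 idx 0 > d then
        (PySem.List.pySetD st.1 idx d,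
         (pvA_get_neighbors (PySem.Int.mod idx w) (PySem.Int.floordiv idx w) w h).foldl (fun nf p =>
          if PySem.List.pyGetD sm (p.2 * w + p.1) false = false ∧
              PySem.List.pyGetD (PySem.List.pySetD st.1 idx d) (p.2 * w + p.1) 0 = (1 : Int) <<< 30 then
            PySem.Set.add nf (p.2 * w + p.1)
          else nf) st.2)
      else st) (dist, nf) = (dist, nf) := by
  intro l
  induction l with
  | nil => intro dist nf _; rfl
  | cons c t ih =>
    intro dist nf hle
    rw [List.foldl_cons]
    dsimp only
    rw [if_neg (by
      have := (hle c (by simp)).2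
      omega)]
    exact ih dist nf (fun x hx => hle x (List.mem_cons_of_mem c hx))

theorem pvA_loop_nil (w h : Int) (sm : List Bool) (cap : Int) (dist : List Int) (d : Int) :
    pvA_loop w h sm cap dist [] d = dist := by
  rw [pvA_loop]
  simp

theorem pvA_loop_empty (w h : Int) (sm : List Bool) (cap : Int) (dist : List Int) (d : Int) :
    pvA_loop w h sm cap dist (PySem.Set.empty : PySem.Set Int) d = dist :=
  pvA_loop_nil w h sm cap dist d

theorem pv_master (w h cap : Int) (sm : List Bool) (hw : 0 < w) (hh : 0 < h) :
    ∀ (fuel : Nat) (d : Int) (dist : List Int) (cur : PySem.Set Int),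
    (cap + 1 - d).toNat ≤ fuel → 1 ≤ d → d ≤ pvINF →
    dist.length = (w * h).toNat →
    (∀ i : Int, 0 ≤ i → i < w * h →
      (PySem.List.pyGetD dist i 0 = pvINF ∨
        (0 ≤ PySem.List.pyGetD dist i 0 ∧ PySem.List.pyGetD dist i 0 < d)) ∧
      (PySem.List.pyGetD sm i false = true → PySem.List.pyGetD dist i 0 = 0)) →
    cur.Nodup →
    (∀ j, pvFrontP w h dist (d - 1) j → j ∈ cur) →
    (∀ x ∈ cur, pvFrontP w h dist (d - 1) x ∨
      (0 ≤ x ∧ x < w * h ∧ PySem.List.pyGetD dist x 0 = d - 1)) →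
    pvA_loop w h sm cap dist cur d = pvD_loop w h cap dist d := by
  intro fuel
  induction fuel with
  | zero =>
    intro d dist cur hfuel hd1 hdINF hlen hgood hnd hfsub hsub
    have hcap : ¬ d ≤ cap := by omega
    rw [pvA_loop, pvD_loop, dif_neg (by tauto), dif_neg hcap]
  | succ fuel ih =>
    intro d dist cur hfuel hd1 hdINF hlen hgood hnd hfsub hsub
    rw [pvA_loop, pvD_loop]
    by_cases hcap : d ≤ cap
    · by_cases hcur : cur = []
      · rw [dif_neg (by tauto), dif_pos hcap]
        have hno : ∀ j, ¬ pvFrontP w h dist (d - 1) j := by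
          intro j hF
          have := hfsub j hF
          rw [hcur] at this
          simp at this
        have hstep := pv_stepB_id_noFront w h d dist hw hh hlen hno
        dsimp only
        rw [if_pos hstep]
      · rw [dif_pos ⟨hcur, hcap⟩, dif_pos hcap]
        dsimp only
        set st : List Int × PySem.Set Int :=
          cur.foldl (fun (st : List Int × PySem.Set Int) idx =>
      if PySem.List.pyGetD st.1 idx 0 > d then
        (PySem.List.pySetD st.1 idx d,
         (pvA_get_neighbors (PySem.Int.mod idx w) (PySem.Int.floordiv idx w) w h).foldl (fun nf p =>
          if PySem.List.pyGetD sm (p.2 * w + p.1) false = false ∧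
              PySem.List.pyGetD (PySem.List.pySetD st.1 idx d) (p.2 * w + p.1) 0 = (1 : Int) <<< 30 then
            PySem.Set.add nf (p.2 * w + p.1)
          else nf) st.2)
      else st) (dist, (PySem.Set.empty : PySem.Set Int)) with hst
        by_cases hdinf : d = pvINF
        · have hskip := pv_skip_all w h d sm cur dist (PySem.Set.empty : PySem.Set Int)
            (by
              intro x hx
              rcases hsub x hx with hF | hJ
              · exact ⟨hF.1, by rw [hF.2.2.1, hdinf]⟩
              · exact ⟨hJ.1, by rw [hJ.2.2]; omega⟩)
          rw [hst, hskip]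
          rw [if_pos (pv_stepB_id_INF w h d dist hw hh hlen hdinf)]
          exact pvA_loop_nil w h sm cap dist (d + 1)
        · have hdlt : d < pvINF := lt_of_le_of_ne hdINF hdinf
          obtain ⟨rlen, rval, rnodup, rup, rlo⟩ :=
            pv_round w h d sm dist hw hh hd1 hdlt hlen cur [] dist
              (PySem.Set.empty : PySem.Set Int) hnd (by simp) hsub rfl
              (by
                intro i hi0
                exact ⟨by rintro ⟨hm, _⟩; simp at hm, fun _ => rfl⟩)
              (by simp [PySem.Set.empty]) (by intro j hj; simp [PySem.Set.empty] at hj)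
              (by intro i hi; simp at hi)
              st.1 st.2 (by rw [hst])
          simp only [List.nil_append] at rval rup rlo
          have hgb : (0:Int) ≤ w * h := by positivity
          have hBstep : pvD_step w h dist d = st.1 := by
            apply List.ext_getElem (by rw [pv_stepB_len, rlen])
            intro k h1 h2
            have hk0 : (0:Int) ≤ (k:Int) := by omega
            have hkd : k < dist.length := by
              have := rlen
              omega
            have hkN : (k:Int) < w * h := by omega
            obtain ⟨c1, c2⟩ := pv_stepB_get w h d dist hw hh hlen k hkd
            have hbr : st.1[k] = PySem.List.pyGetD st.1 (k:Int) 0 :=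
              (pv_getD_eq_getElem _ k h2).symm
            rw [hbr]
            by_cases hF : pvFrontP w h dist (d - 1) (k : Int)
            · rw [(rval (k:Int) hk0).1 ⟨hfsub _ hF, hF⟩]
              exact (c2 hF.2.2.1).1 hF.2.2.2
            · rw [(rval (k:Int) hk0).2 (by tauto)]
              by_cases hinf : PySem.List.pyGetD dist (k:Int) 0 = pvINF
              · rw [hinf]
                refine (c2 hinf).2 ?_
                rintro ⟨j, hadj, hv⟩
                exact hF ⟨hk0, hkN, hinf, j, hadj, hv⟩
              · exact c1 hinf
          by_cases hsame : pvD_step w h dist d = dist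
          · rw [if_pos hsame]
            have hd1eq : st.1 = dist := by rw [← hBstep, hsame]
            have hd2nil : st.2 = [] := by
              rw [List.eq_nil_iff_forall_not_mem]
              intro j hj
              obtain ⟨hj0, hjN, hVj, i, hic, hFi, hadj⟩ := rup j hj
              have hvd : PySem.List.pyGetD st.1 i 0 = d :=
                (rval i hFi.1).1 ⟨hic, hFi⟩
              rw [hd1eq] at hvd
              rcases (hgood i hFi.1 hFi.2.1).1 with hA | hA
              · rw [hvd] at hA
                exact hdinf hA
              · omega
            rw [hd1eq, hd2nil]
            exact pvA_loop_nil w h sm cap dist (d + 1)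
          · rw [if_neg hsame, ← hBstep]
            refine ih (d + 1) (pvD_step w h dist d) st.2
              (by omega) (by omega) (by omega) (by rw [pv_stepB_len, hlen]) ?_ rnodup ?_ ?_
            · intro i hi0 hiN
              rw [hBstep]
              by_cases hF : pvFrontP w h dist (d - 1) i
              · rw [(rval i hi0).1 ⟨hfsub _ hF, hF⟩]
                constructor
                · right; omega
                · intro hm
                  have := (hgood i hi0 hiN).2 hm
                  rw [hF.2.2.1] at this
                  rw [pvINF_val] at this
                  omega
              · rw [(rval i hi0).2 (by tauto)]
                constructor
                · rcases (hgood i hi0 hiN).1 with hA | hA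
                  · exact Or.inl hA
                  · right; omega
                · exact (hgood i hi0 hiN).2
            · intro j hFj
              have hd11 : d + 1 - 1 = d := by omega
              rw [hd11, hBstep] at hFj
              obtain ⟨hj0, hjN, hVj', i, hadj, hVi'⟩ := hFj
              obtain ⟨hi0, hiN, -, -⟩ := pvAdj_range (pvAdj_symm hadj)
              have hFi : pvFrontP w h dist (d - 1) i := by
                by_contra hnF
                rw [(rval i hi0).2 (by tauto)] at hVi'
                rcases (hgood i hi0 hiN).1 with hA | hA
                · rw [hVi'] at hA; exact hdinf hA
                · omega
              have hnFj : ¬ pvFrontP w h dist (d - 1) j := by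
                intro hFj
                have := (rval j hj0).1 ⟨hfsub _ hFj, hFj⟩
                rw [this] at hVj'
                rw [pvINF_val] at hdlt hVj'
                omega
              have hVjd : PySem.List.pyGetD dist j 0 = pvINF := by
                have := (rval j hj0).2 (by tauto)
                rw [← this]
                exact hVj'
              have hsmj : PySem.List.pyGetD sm j false = false := by
                rcases Bool.eq_false_or_eq_true (PySem.List.pyGetD sm j false) with hb | hb
                · exfalso
                  have := (hgood j hj0 hjN).2 hb
                  rw [hVjd] at this
                  rw [pvINF_val] at this
                  omega
                · exact hb
              rcases rlo i (hfsub _ hFi) hFi j (pvAdj_symm hadj) hsmj hVjd with hin | ⟨hjc, hFj2⟩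
              · exact hin
              · exact absurd hFj2 hnFj
            · intro x hx
              have hd11 : d + 1 - 1 = d := by omega
              rw [hd11]
              obtain ⟨hx0, hxN, hVx, i, hic, hFi, hadj⟩ := rup x hx
              by_cases hFx : pvFrontP w h dist (d - 1) x
              · right
                refine ⟨hx0, hxN, ?_⟩
                rw [hBstep]
                exact (rval x hx0).1 ⟨hfsub _ hFx, hFx⟩
              · left
                refine ⟨hx0, hxN, ?_, i, pvAdj_symm hadj, ?_⟩
                · rw [hBstep]
                  rw [(rval x hx0).2 (by tauto)]
                  exact hVx
                · rw [hBstep]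
                  exact (rval i hFi.1).1 ⟨hic, hFi⟩
    · rw [dif_neg (by tauto), dif_neg hcap]

theorem pv_cur_add (w h idx : Int) (sm : List Bool) (cur : PySem.Set Int)
    (hw : 0 < w) (hh : 0 < h) (hi0 : 0 ≤ idx) (hilt : idx < w * h) :
    (∀ j : Int,
      j ∈ (pvA_get_neighbors (PySem.Int.mod idx w) (PySem.Int.floordiv idx w) w h).foldl
        (fun cur p =>
          if PySem.List.pyGetD sm (p.2 * w + p.1) false = false then
            PySem.Set.add cur (p.2 * w + p.1)
          else cur) cur ↔
      (j ∈ cur ∨ (pvAdj w h idx j ∧ PySem.List.pyGetD sm j false = false))) := by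
  have heq := PySem.List.foldl_ite_eq_foldl_filter
    (fun (p : Int × Int) => PySem.List.pyGetD sm (p.2 * w + p.1) false = false)
    (fun (cur : PySem.Set Int) (p : Int × Int) => PySem.Set.add cur (p.2 * w + p.1))
    (pvA_get_neighbors (PySem.Int.mod idx w) (PySem.Int.floordiv idx w) w h) cur
  rw [heq]
  intro j
  rw [PySem.Set.mem_foldl_add]
  constructor
  · rintro (hj | ⟨p, hp, rfl⟩)
    · exact Or.inl hj
    · rw [List.mem_filter, decide_eq_true_eq] at hp
      exact Or.inr ⟨(pv_nbrA_idx w h idx _ hw hh hi0 hilt).mp ⟨p, hp.1, rfl⟩, hp.2⟩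
  · rintro (hj | ⟨hadj, hsm⟩)
    · exact Or.inl hj
    · obtain ⟨p, hp, rfl⟩ := (pv_nbrA_idx w h idx j hw hh hi0 hilt).mpr hadj
      refine Or.inr ⟨p, ?_, rfl⟩
      rw [List.mem_filter, decide_eq_true_eq]
      exact ⟨hp, hsm⟩

theorem pv_cur0 (w h : Int) (sm : List Bool) (dist0 : List Int)
    (hw : 0 < w) (hh : 0 < h)
    (hinit : ∀ i : Int, 0 ≤ i → i < w * h →
      PySem.List.pyGetD dist0 i 0 =
        if PySem.List.pyGetD sm i false = true then 0 else pvINF) :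
    (∀ j : Int,
      (j ∈ (PySem.List.pyRange 0 (w * h) 1).foldl (fun cur idx =>
        if PySem.List.pyGetD dist0 idx 0 = 0 then
          (pvA_get_neighbors (PySem.Int.mod idx w) (PySem.Int.floordiv idx w) w h).foldl
            (fun cur p =>
              if PySem.List.pyGetD sm (p.2 * w + p.1) false = false then
                PySem.Set.add cur (p.2 * w + p.1)
              else cur) cur
        else cur) (PySem.Set.empty : PySem.Set Int)) ↔ pvFrontP w h dist0 0 j) ∧
    ((PySem.List.pyRange 0 (w * h) 1).foldl (fun cur idx =>
        if PySem.List.pyGetD dist0 idx 0 = 0 then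
          (pvA_get_neighbors (PySem.Int.mod idx w) (PySem.Int.floordiv idx w) w h).foldl
            (fun cur p =>
              if PySem.List.pyGetD sm (p.2 * w + p.1) false = false then
                PySem.Set.add cur (p.2 * w + p.1)
              else cur) cur
        else cur) (PySem.Set.empty : PySem.Set Int)).Nodup := by
  constructor
  · intro j
    rw [pv_mem_foldl_step _ _
      (fun x j => PySem.List.pyGetD dist0 x 0 = 0 ∧ pvAdj w h x j ∧
        PySem.List.pyGetD sm j false = false) ?_]
    · constructor
      · rintro (hj | ⟨x, hxl, hV0, hadj, hsm⟩)
        · simp [PySem.Set.empty] at hj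
        · obtain ⟨hx0, hxN, hj0, hjN⟩ := pvAdj_range hadj
          have hVj : PySem.List.pyGetD dist0 j 0 = pvINF := by
            rw [hinit j hj0 hjN]
            rw [if_neg (by simp [hsm])]
          exact ⟨hj0, hjN, hVj, x, pvAdj_symm hadj, hV0⟩
      · rintro ⟨hj0, hjN, hVj, i, hadj, hVi⟩
        right
        obtain ⟨-, -, hi0, hiN⟩ := pvAdj_range hadj
        refine ⟨i, ?_, hVi, pvAdj_symm hadj, ?_⟩
        · rw [PySem.List.mem_pyRange_one]
          exact ⟨hi0, hiN⟩
        · rcases Bool.eq_false_or_eq_true (PySem.List.pyGetD sm j false) with hb | hb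
          · exfalso
            rw [hinit j hj0 hjN, if_pos hb] at hVj
            rw [pvINF_val] at hVj
            omega
          · exact hb
    · intro cur x hx j
      rw [PySem.List.mem_pyRange_one] at hx
      by_cases hV0 : PySem.List.pyGetD dist0 x 0 = 0
      · rw [if_pos hV0, pv_cur_add w h x sm cur hw hh hx.1 hx.2]
        tauto
      · rw [if_neg hV0]
        tauto
  · refine pv_nodup_foldl_step _ _ ?_ _ (by simp [PySem.Set.empty])
    intro cur x hx hnd
    by_cases hV0 : PySem.List.pyGetD dist0 x 0 = 0
    · rw [if_pos hV0]
      have heq := PySem.List.foldl_ite_eq_foldl_filter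
        (fun (p : Int × Int) => PySem.List.pyGetD sm (p.2 * w + p.1) false = false)
        (fun (cur : PySem.Set Int) (p : Int × Int) => PySem.Set.add cur (p.2 * w + p.1))
        (pvA_get_neighbors (PySem.Int.mod x w) (PySem.Int.floordiv x w) w h) cur
      rw [heq, ← PySem.Set.update_map_eq_foldl_add]
      exact PySem.Set.nodup_update _ _ hnd
    · rw [if_neg hV0]
      exact hnd

theorem pv_getD_replicate {α : Type} (n : Nat) (v : α) (j : Int) (d : α)
    (hj0 : 0 ≤ j) (hjlt : j < (n : Int)) :
    PySem.List.pyGetD (List.replicate n v) j d = v := by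
  rw [PySem.List.pyGetD_of_nonneg _ _ hj0]
  have : j.toNat < n := by omega
  simp [List.getD_eq_getElem?_getD, this]

theorem pv_relabel (w h cap : Int) (sm : List Bool) (dist : List Int)
    (hw : 0 < w) (hh : 0 < h) :
    (PySem.List.pyRange 0 (w * h) 1).foldl (fun result idx =>
      if PySem.List.pyGetD sm idx false = true ∨
          PySem.List.pyGetD dist idx 0 = (1 : Int) <<< 30 ∨
          PySem.List.pyGetD dist idx 0 > cap then
        PySem.List.pySetD result idx none
      else
        PySem.List.pySetD result idx
          (some (if PySem.List.pyGetD dist idx 0 - 1 = 0 ∧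
              pvA_solid_neighbors_diagonal_only idx w h sm = true then 1
            else PySem.List.pyGetD dist idx 0 - 1)))
      (List.replicate (w * h).toNat (none : Option Int)) =
    (PySem.List.pyRange 0 (w * h) 1).map (fun i =>
      if PySem.List.pyGetD sm i false = true then none
      else if PySem.List.pyGetD dist i 0 = (1 : Int) <<< 30 ∨
          PySem.List.pyGetD dist i 0 > cap then none
      else if PySem.List.pyGetD dist i 0 = 1 ∧ pvD_solid_nbr i w h sm true = true ∧
          pvD_solid_nbr i w h sm false = false then some 1
      else some (PySem.List.pyGetD dist i 0 - 1)) := by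
  have hgb : (0:Int) ≤ w * h := by positivity
  have hNint : (((w * h).toNat : Nat) : Int) = w * h := Int.toNat_of_nonneg hgb
  -- A side: every iteration writes g idx at idx
  have hcongr := PySem.List.foldl_congr_mem (PySem.List.pyRange 0 (w * h) 1)
    (fun result idx =>
      if PySem.List.pyGetD sm idx false = true ∨
          PySem.List.pyGetD dist idx 0 = (1 : Int) <<< 30 ∨
          PySem.List.pyGetD dist idx 0 > cap then
        PySem.List.pySetD result idx none
      else
        PySem.List.pySetD result idx
          (some (if PySem.List.pyGetD dist idx 0 - 1 = 0 ∧
              pvA_solid_neighbors_diagonal_only idx w h sm = true then 1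
            else PySem.List.pyGetD dist idx 0 - 1)))
    (fun result idx => PySem.List.pySetD result idx
      (if PySem.List.pyGetD sm idx false = true ∨
          PySem.List.pyGetD dist idx 0 = (1 : Int) <<< 30 ∨
          PySem.List.pyGetD dist idx 0 > cap then none
        else some (if PySem.List.pyGetD dist idx 0 - 1 = 0 ∧
              pvA_solid_neighbors_diagonal_only idx w h sm = true then 1
            else PySem.List.pyGetD dist idx 0 - 1)))
    (List.replicate (w * h).toNat (none : Option Int))
    (by
      intro acc idx _
      beta_reduce
      by_cases hc : PySem.List.pyGetD sm idx false = true ∨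
          PySem.List.pyGetD dist idx 0 = (1 : Int) <<< 30 ∨
          PySem.List.pyGetD dist idx 0 > cap
      · rw [if_pos hc, if_pos hc]
      · rw [if_neg hc, if_neg hc])
  rw [hcongr]
  rw [PySem.List.pyRange_zero, List.foldl_map]
  obtain ⟨hlenA, hvalA⟩ := pv_fold_set_aux
    (fun idx => if PySem.List.pyGetD sm idx false = true ∨
        PySem.List.pyGetD dist idx 0 = (1 : Int) <<< 30 ∨
        PySem.List.pyGetD dist idx 0 > cap then none
      else some (if PySem.List.pyGetD dist idx 0 - 1 = 0 ∧
            pvA_solid_neighbors_diagonal_only idx w h sm = true then 1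
          else PySem.List.pyGetD dist idx 0 - 1))
    (w * h).toNat (none : Option Int) (w * h).toNat
    (List.replicate (w * h).toNat (none : Option Int)) (by simp) (le_refl _)
  apply List.ext_getElem
  · rw [hlenA, List.length_map, List.length_map, List.length_range]
  · intro k h1 h2
    have hk0 : (0:Int) ≤ (k : Int) := by omega
    have hkN : (k : Int) < w * h := by
      rw [hlenA] at h1
      omega
    have hlhs := hvalA (k : Int) hk0
    rw [if_pos (by omega : (k:Int) < (((w * h).toNat : Nat) : Int))] at hlhs
    rw [← pv_getD_eq_getElem' _ (none : Option Int) k (by rw [hlenA]; omega), hlhs]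
    simp only [List.getElem_map, List.getElem_range]
    -- now compare the two label formulas at index k
    by_cases hm : PySem.List.pyGetD sm (k : Int) false = true
    · rw [if_pos (Or.inl hm), if_pos hm]
    · rw [if_neg hm]
      by_cases hc : PySem.List.pyGetD dist (k : Int) 0 = (1 : Int) <<< 30 ∨
          PySem.List.pyGetD dist (k : Int) 0 > cap
      · rw [if_pos (Or.inr hc), if_pos hc]
      · rw [if_neg (by tauto), if_neg hc]
        rw [pv_diag_eq (k : Int) w h sm]
        by_cases h1v : PySem.List.pyGetD dist (k : Int) 0 = 1
        · by_cases hd : pvD_solid_nbr (k : Int) w h sm true = true ∧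
              pvD_solid_nbr (k : Int) w h sm false = false
          · rw [if_pos ⟨by omega, by rw [hd.1, hd.2]; rfl⟩, if_pos ⟨h1v, hd.1, hd.2⟩]
          · rw [if_neg ?_, if_neg ?_]
            · rintro ⟨-, h2, h3⟩
              exact hd ⟨h2, h3⟩
            · rintro ⟨-, hb⟩
              exact hd (by simpa using hb)
        · rw [if_neg (by rintro ⟨hz, -⟩; exact h1v (by omega)),
            if_neg (by rintro ⟨h1, -⟩; exact h1v h1)]

theorem pv_dist0 (w h : Int) (sm : List Bool) (hw : 0 < w) (hh : 0 < h) :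
    (((PySem.List.pyRange 0 h 1).foldl (fun dist y =>
        (PySem.List.pyRange 0 w 1).foldl (fun dist x =>
          if PySem.List.pyGetD sm (y * w + x) false = true then
            PySem.List.pySetD dist (y * w + x) (0 : Int) else dist) dist)
        (List.replicate (w * h).toNat ((1 : Int) <<< 30))).length = (w * h).toNat) ∧
    (∀ j : Int, 0 ≤ j → j < w * h →
      PySem.List.pyGetD ((PySem.List.pyRange 0 h 1).foldl (fun dist y =>
        (PySem.List.pyRange 0 w 1).foldl (fun dist x =>
          if PySem.List.pyGetD sm (y * w + x) false = true then
            PySem.List.pySetD dist (y * w + x) (0 : Int) else dist) dist)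
        (List.replicate (w * h).toNat ((1 : Int) <<< 30))) j 0 =
      if PySem.List.pyGetD sm j false = true then 0 else pvINF) := by
  have hgb : (0:Int) ≤ w * h := by positivity
  have hNint : (((w * h).toNat : Nat) : Int) = w * h := Int.toNat_of_nonneg hgb
  have hhint : ((h.toNat : Nat) : Int) = h := Int.toNat_of_nonneg (by omega)
  have hr : (PySem.List.pyRange 0 h 1) = (List.range h.toNat).map (fun k => ((k : Nat) : Int)) := by
    have := PySem.List.pyRange_zero_nat h.toNat
    rw [hhint] at this
    exact this
  rw [hr]
  obtain ⟨hlen, hval⟩ := pv_initA_outer w h sm (w * h).toNat rfl hw hh h.toNat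
    (by omega) (List.replicate (w * h).toNat ((1 : Int) <<< 30)) (by simp)
  refine ⟨hlen, ?_⟩
  intro j hj0 hjN
  rw [hval j hj0]
  have hbound : j < (h.toNat : Int) * w := by
    rw [hhint]
    have : h * w = w * h := mul_comm h w
    omega
  by_cases hm : PySem.List.pyGetD sm j false = true
  · rw [if_pos ⟨hbound, hm⟩, if_pos hm]
  · rw [if_neg (by tauto), if_neg hm]
    rw [pv_getD_replicate (w * h).toNat ((1 : Int) <<< 30) j 0 hj0 (by omega)]
    rfl

-- ==== Chebyshev characterization of the distance field ====

theorem pv_max_eq_iff (a b c : Int) : max a b = c ↔ (a ≤ c ∧ b ≤ c ∧ (a = c ∨ b = c)) := by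
  rcases max_choice a b with hm | hm <;>
    [have hle := le_max_right a b; have hle := le_max_left a b] <;>
    rw [hm] at hle <;> rw [hm] <;> constructor <;> intro h2 <;> omega

theorem pv_mem_solids (w h : Int) (sm : List Bool) (sx sy : Int) (hw : 0 < w) :
    (sx, sy) ∈ pvB_solids w h sm ↔
      0 ≤ sx ∧ sx < w ∧ 0 ≤ sy ∧ sy < h ∧
      PySem.List.pyGetD sm (sy * w + sx) false = true := by
  unfold pvB_solids
  simp only [List.mem_flatMap, List.mem_map, List.mem_filter, PySem.List.mem_pyRange_one]
  constructor
  · rintro ⟨y, hy, x, ⟨hx, hsm⟩, heq⟩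
    obtain ⟨rfl, rfl⟩ : x = sx ∧ y = sy := by simpa [Prod.ext_iff] using heq
    exact ⟨hx.1, hx.2, hy.1, hy.2, hsm⟩
  · rintro ⟨h1, h2, h3, h4, h5⟩
    exact ⟨sy, ⟨h3, h4⟩, sx, ⟨⟨h1, h2⟩, h5⟩, rfl⟩

theorem pv_minCheb_none (x y : Int) (l : List (Int × Int)) :
    pvB_minCheb x y l = none ↔ l = [] := by
  cases l with
  | nil => simp [pvB_minCheb]
  | cons a t =>
    simp only [pvB_minCheb, List.foldl_cons]
    constructor
    · intro hc
      exfalso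
      have : ∀ (t : List (Int × Int)) (m : Int),
          t.foldl (fun acc s =>
            match acc with
            | none => some (max |x - s.1| |y - s.2|)
            | some m => some (min m (max |x - s.1| |y - s.2|))) (some m) ≠ none := by
        intro t
        induction t with
        | nil => intro m; simp
        | cons b u ih => intro m; rw [List.foldl_cons]; exact ih _
      exact this t _ hc
    · intro hc; cases hc

theorem pv_minCheb_foldl (x y : Int) :
    ∀ (l : List (Int × Int)) (m0 : Int),
      l.foldl (fun acc s =>
        match acc with
        | none => some (max |x - s.1| |y - s.2|)
        | some m => some (min m (max |x - s.1| |y - s.2|))) (some m0) =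
      some (l.foldl (fun m s => min m (max |x - s.1| |y - s.2|)) m0) := by
  intro l
  induction l with
  | nil => intro m0; rfl
  | cons a t ih => intro m0; rw [List.foldl_cons, List.foldl_cons]; exact ih _

theorem pv_foldl_min_spec (x y : Int) :
    ∀ (l : List (Int × Int)) (m0 : Int),
      (l.foldl (fun m s => min m (max |x - s.1| |y - s.2|)) m0 ≤ m0) ∧
      (∀ s ∈ l, l.foldl (fun m s => min m (max |x - s.1| |y - s.2|)) m0 ≤ max |x - s.1| |y - s.2|) ∧
      (l.foldl (fun m s => min m (max |x - s.1| |y - s.2|)) m0 = m0 ∨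
        ∃ s ∈ l, l.foldl (fun m s => min m (max |x - s.1| |y - s.2|)) m0 = max |x - s.1| |y - s.2|) := by
  intro l
  induction l with
  | nil => intro m0; exact ⟨le_refl _, by simp, Or.inl rfl⟩
  | cons a t ih =>
    intro m0
    rw [List.foldl_cons]
    obtain ⟨i1, i2, i3⟩ := ih (min m0 (max |x - a.1| |y - a.2|))
    refine ⟨le_trans i1 (min_le_left _ _), ?_, ?_⟩
    · intro s hs
      rcases List.mem_cons.mp hs with rfl | hs
      · exact le_trans i1 (min_le_right _ _)
      · exact i2 s hs
    · rcases i3 with h | ⟨s, hs, h⟩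
      · rcases min_choice m0 (max |x - a.1| |y - a.2|) with hm | hm
        · exact Or.inl (h.trans hm)
        · exact Or.inr ⟨a, List.mem_cons_self, h.trans hm⟩
      · exact Or.inr ⟨s, List.mem_cons_of_mem a hs, h⟩

theorem pv_minCheb_spec (x y m : Int) (l : List (Int × Int))
    (h : pvB_minCheb x y l = some m) :
    (∀ s ∈ l, m ≤ max |x - s.1| |y - s.2|) ∧
    (∃ s ∈ l, m = max |x - s.1| |y - s.2|) := by
  cases l with
  | nil => simp [pvB_minCheb] at h
  | cons a t =>
    rw [pvB_minCheb, List.foldl_cons] at h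
    rw [pv_minCheb_foldl] at h
    obtain ⟨i1, i2, i3⟩ := pv_foldl_min_spec x y t (max |x - a.1| |y - a.2|)
    have hm : m = t.foldl (fun m s => min m (max |x - s.1| |y - s.2|)) (max |x - a.1| |y - a.2|) := by
      injection h with h; omega
    subst hm
    refine ⟨?_, ?_⟩
    · intro s hs
      rcases List.mem_cons.mp hs with rfl | hs
      · exact i1
      · exact i2 s hs
    · rcases i3 with h | ⟨s, hs, h⟩
      · exact ⟨a, List.mem_cons_self, h⟩
      · exact ⟨s, List.mem_cons_of_mem a hs, h⟩

theorem pv_minCheb_le (x y c : Int) (l : List (Int × Int)) (s : Int × Int)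
    (hs : s ∈ l) (hc : max |x - s.1| |y - s.2| ≤ c) :
    ∃ m, pvB_minCheb x y l = some m ∧ m ≤ c := by
  rcases hml : pvB_minCheb x y l with _ | m
  · rw [pv_minCheb_none] at hml
    subst hml
    simp at hs
  · obtain ⟨h1, -⟩ := pv_minCheb_spec x y m l hml
    exact ⟨m, rfl, le_trans (h1 s hs) hc⟩

-- index-level minimum Chebyshev distance
def pvMI (w : Int) (solids : List (Int × Int)) (k : Int) : Option Int :=
  pvB_minCheb (PySem.Int.mod k w) (PySem.Int.floordiv k w) solids

theorem pv_MI_pos (w h : Int) (sm : List Bool) (k m : Int) (hw : 0 < w) (hh : 0 < h)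
    (hk0 : 0 ≤ k) (hkN : k < w * h) (hns : ¬ PySem.List.pyGetD sm k false = true)
    (hMI : pvMI w (pvB_solids w h sm) k = some m) : 1 ≤ m := by
  obtain ⟨hx0, hxw, hy0, hyh, hdec⟩ := pv_coords w h k hw hh hk0 hkN
  obtain ⟨-, ⟨sx, sy⟩, hs, hm⟩ := pv_minCheb_spec _ _ m _ hMI
  rw [pv_mem_solids w h sm sx sy hw] at hs
  dsimp only at hm
  by_contra hlt
  have hm' := hm.symm
  rw [pv_max_eq_iff, Int.abs_eq_natAbs, Int.abs_eq_natAbs] at hm'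
  have hxx : PySem.Int.mod k w = sx := by omega
  have hyy : PySem.Int.floordiv k w = sy := by omega
  apply hns
  rw [hdec, hyy, hxx]
  exact hs.2.2.2.2

-- adjacency at index level ↔ Chebyshev distance 1 at coordinate level
theorem pv_cheb_adj (w h k sx sy : Int) (hw : 0 < w) (hh : 0 < h)
    (hk0 : 0 ≤ k) (hkN : k < w * h)
    (hsx : 0 ≤ sx) (hsxw : sx < w) (hsy : 0 ≤ sy) (hsyh : sy < h)
    (hc : max |PySem.Int.mod k w - sx| |PySem.Int.floordiv k w - sy| = 1) :
    pvAdj w h k (sy * w + sx) := by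
  obtain ⟨hx0, hxw, hy0, hyh, hdec⟩ := pv_coords w h k hw hh hk0 hkN
  rw [pv_max_eq_iff, Int.abs_eq_natAbs, Int.abs_eq_natAbs] at hc
  refine ⟨PySem.Int.mod k w, PySem.Int.floordiv k w, sx, sy, hx0, hxw, hy0, hyh,
    hsx, hsxw, hsy, hsyh, hdec, rfl, by omega, by omega, ?_⟩
  intro hcontra
  obtain ⟨hux, huy⟩ := pv_index_unique w (PySem.Int.mod k w) (PySem.Int.floordiv k w) sx sy
    hx0 hxw hsx hsxw (by omega)
  omega

theorem pv_adj_cheb (w h k j : Int) (hw : 0 < w) (hh : 0 < h) (hadj : pvAdj w h k j) :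
    max |PySem.Int.mod k w - PySem.Int.mod j w|
        |PySem.Int.floordiv k w - PySem.Int.floordiv j w| = 1 := by
  obtain ⟨xi, yi, xj, yj, h1, h2, h3, h4, h5, h6, h7, h8, h9, h10, h11, h12, h13⟩ := hadj
  obtain ⟨hk0, hkN, hj0, hjN⟩ := pvAdj_range ⟨xi, yi, xj, yj, h1, h2, h3, h4, h5, h6, h7, h8, h9, h10, h11, h12, h13⟩
  obtain ⟨hx0, hxw, hy0, hyh, hdec⟩ := pv_coords w h k hw hh hk0 hkN
  obtain ⟨hx0', hxw', hy0', hyh', hdec'⟩ := pv_coords w h j hw hh hj0 hjN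
  obtain ⟨hux, huy⟩ := pv_index_unique w xi yi (PySem.Int.mod k w) (PySem.Int.floordiv k w)
    h1 h2 hx0 hxw (by omega)
  obtain ⟨hux', huy'⟩ := pv_index_unique w xj yj (PySem.Int.mod j w) (PySem.Int.floordiv j w)
    h5 h6 hx0' hxw' (by omega)
  rw [pv_max_eq_iff, Int.abs_eq_natAbs, Int.abs_eq_natAbs]
  have hne : ¬ (xi = xj ∧ yi = yj) := by
    rintro ⟨e1, e2⟩
    exact h13 (by rw [h9, h10, e1, e2])
  omega

-- Chebyshev triangle inequality through an adjacent cell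
theorem pv_cheb_tri (x y u v a b : Int) :
    max |x - a| |y - b| ≤ max |x - u| |y - v| + max |u - a| |v - b| := by
  apply max_le
  · calc |x - a| ≤ |x - u| + |u - a| := abs_sub_le x u a
      _ ≤ _ := add_le_add (le_max_left _ _) (le_max_left _ _)
  · calc |y - b| ≤ |y - v| + |v - b| := abs_sub_le y v b
      _ ≤ _ := add_le_add (le_max_right _ _) (le_max_right _ _)

-- one monotone step from (x, y) toward (sx, sy) reduces the Chebyshev distance by one
theorem pv_step_toward (w h x y sx sy m : Int)
    (hx0 : 0 ≤ x) (hxw : x < w) (hy0 : 0 ≤ y) (hyh : y < h)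
    (hsx : 0 ≤ sx) (hsxw : sx < w) (hsy : 0 ≤ sy) (hsyh : sy < h)
    (hm : max |x - sx| |y - sy| = m) (hm2 : 2 ≤ m) :
    ∃ x' y', 0 ≤ x' ∧ x' < w ∧ 0 ≤ y' ∧ y' < h ∧
      max |x - x'| |y - y'| = 1 ∧ max |x' - sx| |y' - sy| = m - 1 := by
  rw [pv_max_eq_iff, Int.abs_eq_natAbs, Int.abs_eq_natAbs] at hm
  refine ⟨x + (if x < sx then 1 else if sx < x then -1 else 0),
          y + (if y < sy then 1 else if sy < y then -1 else 0), ?_, ?_, ?_, ?_, ?_, ?_⟩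
  · split_ifs <;> omega
  · split_ifs <;> omega
  · split_ifs <;> omega
  · split_ifs <;> omega
  · rw [pv_max_eq_iff, Int.abs_eq_natAbs, Int.abs_eq_natAbs]
    split_ifs <;> omega
  · rw [pv_max_eq_iff, Int.abs_eq_natAbs, Int.abs_eq_natAbs]
    split_ifs <;> omega

theorem pv_MI_solid_adj (w h : Int) (sm : List Bool) (k j : Int) (hw : 0 < w) (hh : 0 < h)
    (hadj : pvAdj w h k j) (hsm : PySem.List.pyGetD sm j false = true) :
    ∃ m, pvMI w (pvB_solids w h sm) k = some m ∧ m ≤ 1 := by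
  obtain ⟨-, -, hj0, hjN⟩ := pvAdj_range hadj
  obtain ⟨hx0', hxw', hy0', hyh', hdec'⟩ := pv_coords w h j hw hh hj0 hjN
  have hmem : (PySem.Int.mod j w, PySem.Int.floordiv j w) ∈ pvB_solids w h sm := by
    rw [pv_mem_solids w h sm _ _ hw]
    exact ⟨hx0', hxw', hy0', hyh', by rw [← hdec']; exact hsm⟩
  have hc1 := pv_adj_cheb w h k j hw hh hadj
  exact pv_minCheb_le _ _ 1 _ _ hmem (le_of_eq hc1)

theorem pv_MI_up (w h : Int) (sm : List Bool) (k j e : Int) (hw : 0 < w) (hh : 0 < h)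
    (hadj : pvAdj w h k j)
    (hMIj : pvMI w (pvB_solids w h sm) j = some e) :
    ∃ m, pvMI w (pvB_solids w h sm) k = some m ∧ m ≤ e + 1 := by
  obtain ⟨-, ⟨sx, sy⟩, hsmem, hsval⟩ := pv_minCheb_spec _ _ e _ hMIj
  have hc1 := pv_adj_cheb w h k j hw hh hadj
  have htri := pv_cheb_tri (PySem.Int.mod k w) (PySem.Int.floordiv k w)
    (PySem.Int.mod j w) (PySem.Int.floordiv j w) sx sy
  rw [hc1] at htri
  dsimp only at hsval
  refine pv_minCheb_le _ _ (e + 1) _ (sx, sy) hsmem ?_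
  dsimp only
  linarith [htri]

theorem pv_MI_down (w h : Int) (sm : List Bool) (k m : Int) (hw : 0 < w) (hh : 0 < h)
    (hk0 : 0 ≤ k) (hkN : k < w * h) (hns : ¬ PySem.List.pyGetD sm k false = true)
    (hMI : pvMI w (pvB_solids w h sm) k = some m) (hm1 : 1 ≤ m) :
    ∃ j, pvAdj w h k j ∧
      ((m = 1 ∧ PySem.List.pyGetD sm j false = true) ∨
       (2 ≤ m ∧ ¬ PySem.List.pyGetD sm j false = true ∧
         pvMI w (pvB_solids w h sm) j = some (m - 1))) := by
  obtain ⟨hx0, hxw, hy0, hyh, hdec⟩ := pv_coords w h k hw hh hk0 hkN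
  obtain ⟨hminall, ⟨sx, sy⟩, hsmem, hmeq⟩ := pv_minCheb_spec _ _ m _ hMI
  have hs := (pv_mem_solids w h sm sx sy hw).mp hsmem
  dsimp only at hmeq
  rcases eq_or_lt_of_le hm1 with h1 | h2
  · refine ⟨sy * w + sx,
      pv_cheb_adj w h k sx sy hw hh hk0 hkN hs.1 hs.2.1 hs.2.2.1 hs.2.2.2.1 (by omega), ?_⟩
    exact Or.inl ⟨h1.symm, hs.2.2.2.2⟩
  · obtain ⟨x', y', hx0', hxw', hy0', hyh', hc1, hc2⟩ :=
      pv_step_toward w h (PySem.Int.mod k w) (PySem.Int.floordiv k w) sx sy m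
        hx0 hxw hy0 hyh hs.1 hs.2.1 hs.2.2.1 hs.2.2.2.1 hmeq.symm (by omega)
    refine ⟨y' * w + x',
      pv_cheb_adj w h k x' y' hw hh hk0 hkN hx0' hxw' hy0' hyh' hc1, ?_⟩
    right
    obtain ⟨hmx, hmy⟩ := pv_div_mod_of w x' y' hw hx0' hxw'
    have hns' : ¬ PySem.List.pyGetD sm (y' * w + x') false = true := by
      intro hsm'
      have hmem' : (x', y') ∈ pvB_solids w h sm :=
        (pv_mem_solids w h sm x' y' hw).mpr ⟨hx0', hxw', hy0', hyh', hsm'⟩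
      have hmin' := hminall (x', y') hmem'
      dsimp only at hmin'
      rw [hc1] at hmin'
      omega
    obtain ⟨m', hm'eq, hm'le⟩ :=
      pv_minCheb_le x' y' (m - 1) (pvB_solids w h sm) (sx, sy) hsmem (le_of_eq hc2)
    have hge : m - 1 ≤ m' := by
      obtain ⟨-, ⟨tx, ty⟩, htmem, htval⟩ := pv_minCheb_spec x' y' m' _ hm'eq
      have htri := pv_cheb_tri (PySem.Int.mod k w) (PySem.Int.floordiv k w) x' y' tx ty
      have hmin := hminall (tx, ty) htmem
      dsimp only at htval hmin
      rw [hc1] at htri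
      linarith [htri, htval, hmin]
    refine ⟨by omega, hns', ?_⟩
    unfold pvMI
    rw [hmx, hmy, hm'eq]
    congr 1
    omega

theorem pv_noMI_up (w h : Int) (sm : List Bool) (d : Int) (hw : 0 < w) (hh : 0 < h)
    (hd : 1 ≤ d)
    (H : ∀ k, 0 ≤ k → k < w * h → ¬ PySem.List.pyGetD sm k false = true →
      pvMI w (pvB_solids w h sm) k ≠ some d) :
    ∀ e, d ≤ e → ∀ k, 0 ≤ k → k < w * h → ¬ PySem.List.pyGetD sm k false = true →
      pvMI w (pvB_solids w h sm) k ≠ some e := by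
  intro e he
  induction e, he using Int.le_induction with
  | base => exact H
  | succ e hde ih =>
    intro k hk0 hkN hns hMI
    obtain ⟨j, hadj, hcase⟩ := pv_MI_down w h sm k (e + 1) hw hh hk0 hkN hns hMI (by omega)
    rcases hcase with ⟨h1, -⟩ | ⟨-, hnsj, hMIj⟩
    · omega
    · obtain ⟨-, -, hj0, hjN⟩ := pvAdj_range hadj
      have he1 : e + 1 - 1 = e := by omega
      rw [he1] at hMIj
      exact ih j hj0 hjN hnsj hMIj

-- the distance value after all rounds < d have run, and after the whole loop
def pvVal (w : Int) (sm : List Bool) (solids : List (Int × Int)) (d k : Int) : Int :=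
  if PySem.List.pyGetD sm k false = true then 0
  else match pvMI w solids k with
    | none => pvINF
    | some m => if m < d then m else pvINF

def pvFin (w : Int) (sm : List Bool) (solids : List (Int × Int)) (cap k : Int) : Int :=
  if PySem.List.pyGetD sm k false = true then 0
  else match pvMI w solids k with
    | none => pvINF
    | some m => if m ≤ cap then m else pvINF

theorem pv_dil_loop (w h cap : Int) (sm : List Bool) (hw : 0 < w) (hh : 0 < h)
    (hcap : cap < pvINF) :
    ∀ (fuel : Nat) (d : Int) (dist : List Int),
    (cap + 1 - d).toNat ≤ fuel → 1 ≤ d →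
    dist.length = (w * h).toNat →
    (∀ j : Int, 0 ≤ j → j < w * h →
      PySem.List.pyGetD dist j 0 = pvVal w sm (pvB_solids w h sm) d j) →
    (∀ j : Int, 0 ≤ j → j < w * h → ¬ PySem.List.pyGetD sm j false = true →
      ∀ m, pvMI w (pvB_solids w h sm) j = some m → m < d → m ≤ cap) →
    ∀ j : Int, 0 ≤ j → j < w * h →
      PySem.List.pyGetD (pvD_loop w h cap dist d) j 0 = pvFin w sm (pvB_solids w h sm) cap j := by
  have hgb : (0:Int) ≤ w * h := by positivity
  have hcapv : cap < 1073741824 := by rw [← pvINF_val]; exact hcap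
  intro fuel
  induction fuel with
  | zero =>
    intro d dist hfuel hd1 hlen hinv hWx j hj0 hjN
    have hdc : ¬ d ≤ cap := by omega
    rw [pvD_loop, dif_neg hdc, hinv j hj0 hjN]
    unfold pvVal pvFin
    by_cases hsm : PySem.List.pyGetD sm j false = true
    · rw [if_pos hsm, if_pos hsm]
    · rw [if_neg hsm, if_neg hsm]
      rcases hM : pvMI w (pvB_solids w h sm) j with _ | m
      · rfl
      · dsimp only
        by_cases hmd : m < d
        · rw [if_pos hmd, if_pos (hWx j hj0 hjN hsm m hM hmd)]
        · rw [if_neg hmd, if_neg (by omega)]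
  | succ fuel ih =>
    intro d dist hfuel hd1 hlen hinv hWx
    rw [pvD_loop]
    by_cases hdc : d ≤ cap
    · rw [dif_pos hdc]
      dsimp only
      -- the "has an adjacent cell at distance d-1" test, decoded through the invariant
      have hiff : ∀ j : Int, 0 ≤ j → j < w * h → ¬ PySem.List.pyGetD sm j false = true →
          (pvMI w (pvB_solids w h sm) j = none ∨
            ∀ m, pvMI w (pvB_solids w h sm) j = some m → ¬ m < d) →
          ((∃ j', pvAdj w h j j' ∧ PySem.List.pyGetD dist j' 0 = d - 1) ↔
            pvMI w (pvB_solids w h sm) j = some d) := by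
        intro j hj0 hjN hns hnm
        constructor
        · rintro ⟨j', hadj, hvj'⟩
          obtain ⟨-, -, hj'0, hj'N⟩ := pvAdj_range hadj
          by_cases hsmj' : PySem.List.pyGetD sm j' false = true
          · have hv0 : PySem.List.pyGetD dist j' 0 = 0 := by
              rw [hinv j' hj'0 hj'N]
              unfold pvVal
              rw [if_pos hsmj']
            have hd1' : d = 1 := by omega
            obtain ⟨m, hMk, hm1⟩ := pv_MI_solid_adj w h sm j j' hw hh hadj hsmj'
            have hpos := pv_MI_pos w h sm j m hw hh hj0 hjN hns hMk
            rw [hMk, hd1']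
            congr 1
            omega
          · have hv := hinv j' hj'0 hj'N
            unfold pvVal at hv
            rw [if_neg hsmj'] at hv
            rcases hM' : pvMI w (pvB_solids w h sm) j' with _ | m'
            · rw [hM'] at hv
              dsimp only at hv
              rw [hv] at hvj'
              rw [pvINF_val] at hvj'
              omega
            · rw [hM'] at hv
              dsimp only at hv
              by_cases hm'd : m' < d
              · rw [if_pos hm'd] at hv
                obtain ⟨m, hMk, hmle⟩ := pv_MI_up w h sm j j' m' hw hh hadj hM'
                rcases hnm with hnone | hforall
                · rw [hnone] at hMk; cases hMk
                · have hmd := hforall m hMk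
                  rw [hMk]
                  congr 1
                  omega
              · rw [if_neg hm'd] at hv
                rw [hv] at hvj'
                rw [pvINF_val] at hvj'
                omega
        · intro hMd
          obtain ⟨j', hadj, hcase⟩ := pv_MI_down w h sm j d hw hh hj0 hjN hns hMd hd1
          refine ⟨j', hadj, ?_⟩
          obtain ⟨-, -, hj'0, hj'N⟩ := pvAdj_range hadj
          rcases hcase with ⟨hdd, hsmj'⟩ | ⟨hd2, hnsj', hMIj'⟩
          · rw [hinv j' hj'0 hj'N]
            unfold pvVal
            rw [if_pos hsmj']
            omega
          · rw [hinv j' hj'0 hj'N]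
            unfold pvVal
            rw [if_neg hnsj', hMIj']
            dsimp only
            rw [if_pos (by omega)]
      -- one synchronous round advances the invariant from d to d + 1
      have hstep_char : ∀ j : Int, 0 ≤ j → j < w * h →
          PySem.List.pyGetD (pvD_step w h dist d) j 0 =
            pvVal w sm (pvB_solids w h sm) (d + 1) j := by
        intro j hj0 hjN
        have hk : j.toNat < dist.length := by omega
        have hjk : ((j.toNat : Nat) : Int) = j := by omega
        obtain ⟨c1, c2⟩ := pv_stepB_get w h d dist hw hh hlen j.toNat hk
        rw [hjk] at c1 c2
        have hgetstep : PySem.List.pyGetD (pvD_step w h dist d) j 0 =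
            (pvD_step w h dist d)[j.toNat]'(by rw [pv_stepB_len]; exact hk) := by
          conv_lhs => rw [← hjk]
          exact pv_getD_eq_getElem _ j.toNat (by rw [pv_stepB_len]; exact hk)
        rw [hgetstep]
        have hv := hinv j hj0 hjN
        unfold pvVal at hv ⊢
        by_cases hsm : PySem.List.pyGetD sm j false = true
        · rw [if_pos hsm] at hv ⊢
          rw [c1 (by rw [hv, pvINF_val]; omega), hv]
        · rw [if_neg hsm] at hv ⊢
          rcases hM : pvMI w (pvB_solids w h sm) j with _ | m
          · rw [hM] at hv
            dsimp only at hv ⊢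
            have hnadj : ¬ ∃ j', pvAdj w h j j' ∧ PySem.List.pyGetD dist j' 0 = d - 1 := by
              intro hex
              have := (hiff j hj0 hjN hsm (Or.inl hM)).mp hex
              rw [hM] at this
              cases this
            rw [(c2 hv).2 hnadj]
          · rw [hM] at hv
            dsimp only at hv ⊢
            by_cases hmd : m < d
            · rw [if_pos hmd] at hv
              rw [if_pos (by omega : m < d + 1)]
              rw [c1 (by rw [hv]; rw [pvINF_val]; omega), hv]
            · rw [if_neg hmd] at hv
              have hIff := hiff j hj0 hjN hsm (Or.inr (fun m' hm' => by
                rw [hM] at hm'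
                injection hm' with e
                omega))
              by_cases hmd1 : m = d
              · rw [if_pos (by omega : m < d + 1)]
                have hex : ∃ j', pvAdj w h j j' ∧ PySem.List.pyGetD dist j' 0 = d - 1 :=
                  hIff.mpr (by rw [hM, hmd1])
                rw [(c2 hv).1 hex, hmd1]
              · rw [if_neg (by omega : ¬ m < d + 1)]
                have hnex : ¬ ∃ j', pvAdj w h j j' ∧ PySem.List.pyGetD dist j' 0 = d - 1 := by
                  intro hex
                  have := hIff.mp hex
                  rw [hM] at this
                  injection this with e
                  omega
                rw [(c2 hv).2 hnex]
      by_cases hsame : pvD_step w h dist d = dist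
      · rw [if_pos hsame]
        have hnod : ∀ k, 0 ≤ k → k < w * h → ¬ PySem.List.pyGetD sm k false = true →
            pvMI w (pvB_solids w h sm) k ≠ some d := by
          intro k hk0 hkN hns hMk
          have h1 := hstep_char k hk0 hkN
          rw [hsame, hinv k hk0 hkN] at h1
          unfold pvVal at h1
          rw [if_neg hns, if_neg hns, hMk] at h1
          dsimp only at h1
          rw [if_neg (by omega : ¬ d < d), if_pos (by omega : d < d + 1)] at h1
          rw [pvINF_val] at h1
          omega
        have hup := pv_noMI_up w h sm d hw hh hd1 hnod
        intro j hj0 hjN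
        rw [hinv j hj0 hjN]
        unfold pvVal pvFin
        by_cases hsm : PySem.List.pyGetD sm j false = true
        · rw [if_pos hsm, if_pos hsm]
        · rw [if_neg hsm, if_neg hsm]
          rcases hM : pvMI w (pvB_solids w h sm) j with _ | m
          · rfl
          · dsimp only
            by_cases hmd : m < d
            · rw [if_pos hmd, if_pos (hWx j hj0 hjN hsm m hM hmd)]
            · exact absurd hM (hup m (by omega) j hj0 hjN hsm)
      · rw [if_neg hsame]
        exact ih (d + 1) (pvD_step w h dist d) (by omega) (by omega)
          (by rw [pv_stepB_len, hlen]) hstep_char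
          (fun j hj0 hjN hns m hM hmlt => by
            by_cases hmm : m < d
            · exact hWx j hj0 hjN hns m hM hmm
            · omega)
    · rw [dif_neg hdc]
      intro j hj0 hjN
      rw [hinv j hj0 hjN]
      unfold pvVal pvFin
      by_cases hsm : PySem.List.pyGetD sm j false = true
      · rw [if_pos hsm, if_pos hsm]
      · rw [if_neg hsm, if_neg hsm]
        rcases hM : pvMI w (pvB_solids w h sm) j with _ | m
        · rfl
        · dsimp only
          by_cases hmd : m < d
          · rw [if_pos hmd, if_pos (hWx j hj0 hjN hsm m hM hmd)]
          · rw [if_neg hmd, if_neg (by omega)]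

-- the pixel label written by B at a cell, as a function of the index alone
def pvLab (w cap : Int) (sm : List Bool) (solids : List (Int × Int)) (idx : Int) : Option Int :=
  if PySem.List.pyGetD sm idx false = true then none
  else match pvB_minCheb (PySem.Int.mod idx w) (PySem.Int.floordiv idx w) solids with
    | none => none
    | some d =>
      if d > cap then none
      else if d = 1 ∧ solids.any (fun s =>
              decide (|PySem.Int.mod idx w - s.1| = 1 ∧ |PySem.Int.floordiv idx w - s.2| = 1)) = true ∧
          ¬ (solids.any (fun s =>
              decide (|PySem.Int.mod idx w - s.1| + |PySem.Int.floordiv idx w - s.2| = 1)) = true) then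
        some 1
      else some (d - 1)

theorem pv_opt_inner (w h : Int) (L : Int → Option Int) (N : Nat) (hN : N = (w * h).toNat)
    (hw : 0 < w) (hh : 0 < h) (y : Int) (hy0 : 0 ≤ y) (hyh : y < h) :
    ∀ (m : Nat), (m : Int) ≤ w → ∀ (out : List (Option Int)), out.length = N →
      (((List.range m).map (fun k => ((k : Nat) : Int))).foldl (fun out x =>
          if (L (y * w + x)).isSome = true then
            PySem.List.pySetD out (y * w + x) (L (y * w + x)) else out) out).length = N ∧
      (∀ j : Int, 0 ≤ j →
        PySem.List.pyGetD (((List.range m).map (fun k => ((k : Nat) : Int))).foldl (fun out x =>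
            if (L (y * w + x)).isSome = true then
              PySem.List.pySetD out (y * w + x) (L (y * w + x)) else out) out) j none =
          if y * w ≤ j ∧ j < y * w + (m : Int) ∧ (L j).isSome = true then L j
          else PySem.List.pyGetD out j none) := by
  intro m
  induction m with
  | zero =>
    intro _ out hlen
    refine ⟨by simpa using hlen, ?_⟩
    intro j hj0
    rw [if_neg (by omega)]
    simp
  | succ m ih =>
    intro hm out hlen
    obtain ⟨ihlen, ihval⟩ := ih (by omega) out hlen
    rw [List.range_succ, List.map_append, List.foldl_append]
    simp only [List.map_cons, List.map_nil, List.foldl_cons, List.foldl_nil]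
    have hidx0 : 0 ≤ y * w + (m : Int) := by positivity
    have hidxN : y * w + (m : Int) < (N : Int) := by
      have hmw : (m : Int) < w := by exact_mod_cast hm
      have hpos : (0:Int) < w * h := by positivity
      have hNint : (N : Int) = w * h := by omega
      have k1 : y * w ≤ (h - 1) * w := mul_le_mul_of_nonneg_right (by omega) (by omega)
      have k2 : (h - 1) * w = h * w - w := by ring
      have k3 : w * h = h * w := mul_comm w h
      omega
    constructor
    · split
      · rw [PySem.List.length_pySetD, ihlen]
      · exact ihlen
    · intro j hj0
      by_cases hs : (L (y * w + (m : Int))).isSome = true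
      · rw [if_pos hs]
        rw [pv_getD_set _ _ _ _ _ hidx0 (by rw [ihlen]; omega) hj0, ihval j hj0]
        by_cases hj : j = y * w + (m : Int)
        · subst hj
          rw [if_pos rfl, if_pos ⟨by omega, by omega, hs⟩]
        · rw [if_neg hj]
          by_cases hc : y * w ≤ j ∧ j < y * w + (m : Int) ∧ (L j).isSome = true
          · rw [if_pos hc, if_pos ⟨hc.1, by omega, hc.2.2⟩]
          · rw [if_neg hc, if_neg (by rintro ⟨a, b, c⟩; exact hc ⟨a, by omega, c⟩)]
      · rw [if_neg hs, ihval j hj0]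
        by_cases hc : y * w ≤ j ∧ j < y * w + (m : Int) ∧ (L j).isSome = true
        · rw [if_pos hc, if_pos ⟨hc.1, by omega, hc.2.2⟩]
        · rw [if_neg hc]
          rw [if_neg ?_]
          rintro ⟨a, b, c⟩
          by_cases hj : j = y * w + (m : Int)
          · subst hj; exact hs c
          · exact hc ⟨a, by omega, c⟩

theorem pv_opt_outer (w h : Int) (L : Int → Option Int) (N : Nat) (hN : N = (w * h).toNat)
    (hw : 0 < w) (hh : 0 < h) :
    ∀ (m : Nat), (m : Int) ≤ h → ∀ (out : List (Option Int)), out.length = N →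
      (((List.range m).map (fun k => ((k : Nat) : Int))).foldl (fun out y =>
          (PySem.List.pyRange 0 w 1).foldl (fun out x =>
            if (L (y * w + x)).isSome = true then
              PySem.List.pySetD out (y * w + x) (L (y * w + x)) else out) out) out).length = N ∧
      (∀ j : Int, 0 ≤ j →
        PySem.List.pyGetD (((List.range m).map (fun k => ((k : Nat) : Int))).foldl (fun out y =>
            (PySem.List.pyRange 0 w 1).foldl (fun out x =>
              if (L (y * w + x)).isSome = true then
                PySem.List.pySetD out (y * w + x) (L (y * w + x)) else out) out) out) j none =
          if j < (m : Int) * w ∧ (L j).isSome = true then L j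
          else PySem.List.pyGetD out j none) := by
  intro m
  induction m with
  | zero =>
    intro _ out hlen
    refine ⟨by simpa using hlen, ?_⟩
    intro j hj0
    rw [if_neg (by intro hc; have := hc.1; omega)]
    simp
  | succ m ih =>
    intro hm out hlen
    obtain ⟨ihlen, ihval⟩ := ih (by omega) out hlen
    rw [List.range_succ, List.map_append, List.foldl_append]
    simp only [List.map_cons, List.map_nil, List.foldl_cons, List.foldl_nil]
    rw [PySem.List.pyRange_zero] at ihlen ihval ⊢
    have hrow := pv_opt_inner w h L N hN hw hh (m : Int) (by omega) (by exact_mod_cast hm)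
      w.toNat (by omega) _ ihlen
    obtain ⟨rlen, rval⟩ := hrow
    refine ⟨rlen, ?_⟩
    intro j hj0
    rw [rval j hj0, ihval j hj0]
    have hww : ((w.toNat : Nat) : Int) = w := by omega
    by_cases hc : (m : Int) * w ≤ j ∧ j < (m : Int) * w + w ∧ (L j).isSome = true
    · rw [if_pos (by rw [hww]; exact hc)]
      rw [if_pos ?_]
      push_cast
      have : ((m : Int) + 1) * w = (m : Int) * w + w := by ring
      exact ⟨by omega, hc.2.2⟩
    · rw [if_neg (by rw [hww]; exact hc)]
      by_cases hd : j < (m : Int) * w ∧ (L j).isSome = true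
      · rw [if_pos hd, if_pos ?_]
        push_cast
        have : ((m : Int) + 1) * w = (m : Int) * w + w := by ring
        exact ⟨by omega, hd.2⟩
      · rw [if_neg hd, if_neg ?_]
        push_cast
        have hmul : ((m : Int) + 1) * w = (m : Int) * w + w := by ring
        rintro ⟨a, b⟩
        rcases lt_or_ge j ((m : Int) * w) with hlt | hge
        · exact hd ⟨hlt, b⟩
        · exact hc ⟨hge, by omega, b⟩

-- B's loop body, rewritten as a guarded write of pvLab
theorem pv_alt_body_eq (w h cap : Int) (sm : List Bool) (y x : Int)
    (hw : 0 < w) (hx0 : 0 ≤ x) (hxw : x < w) (out : List (Option Int)) :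
    (if PySem.List.pyGetD sm (y * w + x) false = true then out
     else
       match pvB_minCheb x y (pvB_solids w h sm) with
       | none => out
       | some d =>
         if d > cap then out
         else if d = 1 ∧ (pvB_solids w h sm).any (fun s =>
                 decide (|x - s.1| = 1 ∧ |y - s.2| = 1)) = true ∧
             ¬ ((pvB_solids w h sm).any (fun s =>
                 decide (|x - s.1| + |y - s.2| = 1)) = true) then
           PySem.List.pySetD out (y * w + x) (some 1)
         else PySem.List.pySetD out (y * w + x) (some (d - 1))) =
    (if (pvLab w cap sm (pvB_solids w h sm) (y * w + x)).isSome = true then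
      PySem.List.pySetD out (y * w + x) (pvLab w cap sm (pvB_solids w h sm) (y * w + x))
     else out) := by
  obtain ⟨hmx, hmy⟩ := pv_div_mod_of w x y hw hx0 hxw
  unfold pvLab
  rw [hmx, hmy]
  by_cases hsm : PySem.List.pyGetD sm (y * w + x) false = true
  · rw [if_pos hsm, if_pos hsm]
    simp
  · rw [if_neg hsm, if_neg hsm]
    rcases hM : pvB_minCheb x y (pvB_solids w h sm) with _ | d
    · simp
    · dsimp only
      by_cases hgt : d > cap
      · simp [hgt]
      · by_cases hdg : d = 1 ∧ (pvB_solids w h sm).any (fun s =>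
              decide (|x - s.1| = 1 ∧ |y - s.2| = 1)) = true ∧
            ¬ ((pvB_solids w h sm).any (fun s =>
              decide (|x - s.1| + |y - s.2| = 1)) = true)
        · simp only [if_neg hgt, if_pos hdg]
          simp
        · simp only [if_neg hgt, if_neg hdg]
          simp

theorem pv_alt_char (w h cap : Int) (sm : List Bool) (hw : 0 < w) (hh : 0 < h) :
    (build_fading_contour_py_alt w h sm cap).length = (w * h).toNat ∧
    (∀ j : Int, 0 ≤ j → j < w * h →
      PySem.List.pyGetD (build_fading_contour_py_alt w h sm cap) j none =
        pvLab w cap sm (pvB_solids w h sm) j) := by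
  have hgb : (0:Int) ≤ w * h := by positivity
  have hhint : ((h.toNat : Nat) : Int) = h := Int.toNat_of_nonneg (by omega)
  unfold build_fading_contour_py_alt
  dsimp only
  have hcongr := PySem.List.foldl_congr_mem (PySem.List.pyRange 0 h 1)
    (fun (out : List (Option Int)) y =>
      (PySem.List.pyRange 0 w 1).foldl (fun out x =>
        if PySem.List.pyGetD sm (y * w + x) false = true then out
        else
          match pvB_minCheb x y (pvB_solids w h sm) with
          | none => out
          | some d =>
            if d > cap then out
            else if d = 1 ∧ (pvB_solids w h sm).any (fun s =>
                    decide (|x - s.1| = 1 ∧ |y - s.2| = 1)) = true ∧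
                ¬ ((pvB_solids w h sm).any (fun s =>
                    decide (|x - s.1| + |y - s.2| = 1)) = true) then
              PySem.List.pySetD out (y * w + x) (some 1)
            else PySem.List.pySetD out (y * w + x) (some (d - 1))) out)
    (fun (out : List (Option Int)) y =>
      (PySem.List.pyRange 0 w 1).foldl (fun out x =>
        if (pvLab w cap sm (pvB_solids w h sm) (y * w + x)).isSome = true then
          PySem.List.pySetD out (y * w + x) (pvLab w cap sm (pvB_solids w h sm) (y * w + x))
        else out) out)
    (List.replicate (w * h).toNat (none : Option Int))
    (by
      intro acc y _
      beta_reduce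
      refine PySem.List.foldl_congr_mem (PySem.List.pyRange 0 w 1) _ _ acc ?_
      intro acc2 x hx
      rw [PySem.List.mem_pyRange_one] at hx
      exact pv_alt_body_eq w h cap sm y x hw hx.1 hx.2 acc2)
  rw [hcongr]
  have hr : (PySem.List.pyRange 0 h 1) = (List.range h.toNat).map (fun k => ((k : Nat) : Int)) := by
    have := PySem.List.pyRange_zero_nat h.toNat
    rw [hhint] at this
    exact this
  rw [hr]
  obtain ⟨hlen, hval⟩ := pv_opt_outer w h (pvLab w cap sm (pvB_solids w h sm)) (w * h).toNat rfl
    hw hh h.toNat (by omega) (List.replicate (w * h).toNat (none : Option Int)) (by simp)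
  refine ⟨hlen, ?_⟩
  intro j hj0 hjN
  rw [hval j hj0]
  have hbound : j < (h.toNat : Int) * w := by
    rw [hhint]
    have : h * w = w * h := mul_comm h w
    omega
  by_cases hs : (pvLab w cap sm (pvB_solids w h sm) j).isSome = true
  · rw [if_pos ⟨hbound, hs⟩]
  · rw [if_neg (by tauto)]
    rw [pv_getD_replicate (w * h).toNat (none : Option Int) j none hj0 (by omega)]
    rw [eq_comm, ← Option.not_isSome_iff_eq_none]
    exact fun hc => hs hc

-- A's diagonal/orthogonal solid-neighbor tests, re-expressed over the solids list
theorem pv_diag_solids (w h idx : Int) (sm : List Bool) (hw : 0 < w) (hh : 0 < h)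
    (hi0 : 0 ≤ idx) (hiN : idx < w * h) :
    pvD_solid_nbr idx w h sm true = (pvB_solids w h sm).any (fun s =>
        decide (|PySem.Int.mod idx w - s.1| = 1 ∧ |PySem.Int.floordiv idx w - s.2| = 1)) ∧
    pvD_solid_nbr idx w h sm false = (pvB_solids w h sm).any (fun s =>
        decide (|PySem.Int.mod idx w - s.1| + |PySem.Int.floordiv idx w - s.2| = 1)) := by
  obtain ⟨hx0, hxw, hy0, hyh, hdec⟩ := pv_coords w h idx hw hh hi0 hiN
  constructor
  · rw [Bool.eq_iff_iff, pvD_solid_nbr_iff, List.any_eq_true]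
    constructor
    · rintro ⟨dx, dy, h1, h2, h3, h4, h5, h6⟩
      rw [eq_comm, Bool.and_eq_true, decide_eq_true_eq, decide_eq_true_eq] at h4
      refine ⟨(PySem.Int.mod idx w + dx, PySem.Int.floordiv idx w + dy),
        (pv_mem_solids w h sm _ _ hw).mpr ⟨h5.1, h5.2.1, h5.2.2.1, h5.2.2.2, h6⟩, ?_⟩
      simp only [decide_eq_true_eq]
      constructor
      · have e1 : PySem.Int.mod idx w - (PySem.Int.mod idx w + dx) = -dx := by ring
        rw [e1, abs_neg, Int.abs_eq_natAbs]
        have := h4.1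
        omega
      · have e2 : PySem.Int.floordiv idx w - (PySem.Int.floordiv idx w + dy) = -dy := by ring
        rw [e2, abs_neg, Int.abs_eq_natAbs]
        have := h4.2
        omega
    · rintro ⟨⟨sx, sy⟩, hsmem, hcond⟩
      have hs := (pv_mem_solids w h sm sx sy hw).mp hsmem
      simp only [decide_eq_true_eq] at hcond
      rw [Int.abs_eq_natAbs, Int.abs_eq_natAbs] at hcond
      refine ⟨sx - PySem.Int.mod idx w, sy - PySem.Int.floordiv idx w,
        by omega, by omega, by omega, ?_, ⟨by omega, by omega, by omega, by omega⟩, ?_⟩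
      · rw [eq_comm, Bool.and_eq_true, decide_eq_true_eq, decide_eq_true_eq]
        constructor <;> omega
      · have e1 : PySem.Int.mod idx w + (sx - PySem.Int.mod idx w) = sx := by ring
        have e2 : PySem.Int.floordiv idx w + (sy - PySem.Int.floordiv idx w) = sy := by ring
        rw [e1, e2]
        exact hs.2.2.2.2
  · rw [Bool.eq_iff_iff, pvD_solid_nbr_iff, List.any_eq_true]
    constructor
    · rintro ⟨dx, dy, h1, h2, h3, h4, h5, h6⟩
      rw [eq_comm, Bool.eq_false_iff, ne_eq, Bool.and_eq_true, decide_eq_true_eq,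
        decide_eq_true_eq] at h4
      refine ⟨(PySem.Int.mod idx w + dx, PySem.Int.floordiv idx w + dy),
        (pv_mem_solids w h sm _ _ hw).mpr ⟨h5.1, h5.2.1, h5.2.2.1, h5.2.2.2, h6⟩, ?_⟩
      simp only [decide_eq_true_eq]
      have e1 : PySem.Int.mod idx w - (PySem.Int.mod idx w + dx) = -dx := by ring
      have e2 : PySem.Int.floordiv idx w - (PySem.Int.floordiv idx w + dy) = -dy := by ring
      rw [e1, e2, abs_neg, abs_neg, Int.abs_eq_natAbs, Int.abs_eq_natAbs]
      have hne : ¬ (dx ≠ 0 ∧ dy ≠ 0) := h4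
      omega
    · rintro ⟨⟨sx, sy⟩, hsmem, hcond⟩
      have hs := (pv_mem_solids w h sm sx sy hw).mp hsmem
      simp only [decide_eq_true_eq] at hcond
      rw [Int.abs_eq_natAbs, Int.abs_eq_natAbs] at hcond
      refine ⟨sx - PySem.Int.mod idx w, sy - PySem.Int.floordiv idx w,
        by omega, by omega, by omega, ?_, ⟨by omega, by omega, by omega, by omega⟩, ?_⟩
      · rw [eq_comm, Bool.eq_false_iff, ne_eq, Bool.and_eq_true, decide_eq_true_eq,
          decide_eq_true_eq]
        omega
      · have e1 : PySem.Int.mod idx w + (sx - PySem.Int.mod idx w) = sx := by ring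
        have e2 : PySem.Int.floordiv idx w + (sy - PySem.Int.floordiv idx w) = sy := by ring
        rw [e1, e2]
        exact hs.2.2.2.2

-- A's relabel formula at a cell equals B's label, given the distance characterization
theorem pv_label_eq (w h cap : Int) (sm : List Bool) (dist : List Int)
    (hw : 0 < w) (hh : 0 < h) (hcap : cap < pvINF)
    (hdist : ∀ j : Int, 0 ≤ j → j < w * h →
      PySem.List.pyGetD dist j 0 = pvFin w sm (pvB_solids w h sm) cap j)
    (j : Int) (hj0 : 0 ≤ j) (hjN : j < w * h) :
    (if PySem.List.pyGetD sm j false = true then none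
     else if PySem.List.pyGetD dist j 0 = (1 : Int) <<< 30 ∨
         PySem.List.pyGetD dist j 0 > cap then none
     else if PySem.List.pyGetD dist j 0 = 1 ∧ pvD_solid_nbr j w h sm true = true ∧
         pvD_solid_nbr j w h sm false = false then some 1
     else some (PySem.List.pyGetD dist j 0 - 1)) =
    pvLab w cap sm (pvB_solids w h sm) j := by
  have hcapv : cap < 1073741824 := by rw [← pvINF_val]; exact hcap
  obtain ⟨hdg, hog⟩ := pv_diag_solids w h j sm hw hh hj0 hjN
  rw [hdist j hj0 hjN]
  unfold pvFin pvLab pvMI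
  by_cases hsm : PySem.List.pyGetD sm j false = true
  · simp only [if_pos hsm]
  · simp only [if_neg hsm]
    rcases hM : pvB_minCheb (PySem.Int.mod j w) (PySem.Int.floordiv j w) (pvB_solids w h sm)
      with _ | m
    · dsimp only
      have hT : pvINF = (1:Int) <<< 30 ∨ pvINF > cap := Or.inl rfl
      rw [if_pos hT]
    · dsimp only
      have h30 : ((1:Int) <<< 30) = 1073741824 := by decide
      have hpos : 1 ≤ m :=
        pv_MI_pos w h sm j m hw hh hj0 hjN hsm (by unfold pvMI; exact hM)
      by_cases hle : m ≤ cap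
      · simp only [if_pos hle]
        rw [if_neg (by omega : ¬ m > cap)]
        rw [if_neg (show ¬ (m = (1:Int) <<< 30 ∨ m > cap) by rw [h30]; omega)]
        rw [hdg, hog]
        by_cases hc : m = 1 ∧ ((pvB_solids w h sm).any (fun s =>
              decide (|PySem.Int.mod j w - s.1| = 1 ∧ |PySem.Int.floordiv j w - s.2| = 1))) = true ∧
            ¬ (((pvB_solids w h sm).any (fun s =>
              decide (|PySem.Int.mod j w - s.1| + |PySem.Int.floordiv j w - s.2| = 1))) = true)
        · rw [if_pos hc, if_pos ⟨hc.1, hc.2.1, by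
            rcases Bool.eq_false_or_eq_true ((pvB_solids w h sm).any (fun s =>
              decide (|PySem.Int.mod j w - s.1| + |PySem.Int.floordiv j w - s.2| = 1))) with hb | hb
            · exact absurd hb hc.2.2
            · exact hb⟩]
        · rw [if_neg hc, if_neg (by
            rintro ⟨a, b, c⟩
            exact hc ⟨a, b, by rw [c]; simp⟩)]
      · simp only [if_neg hle]
        have hT : pvINF = (1:Int) <<< 30 ∨ pvINF > cap := Or.inl rfl
        rw [if_pos hT, if_pos (by omega : m > cap)]


-- the alt output always has grid length (used for the degenerate empty grid)
theorem pv_alt_len (w h : Int) (sm : List Bool) (cap : Int) :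
    (build_fading_contour_py_alt w h sm cap).length = (w * h).toNat := by
  unfold build_fading_contour_py_alt
  dsimp only
  have houter : ∀ (l : List Int) (out : List (Option Int)),
      (l.foldl (fun out y =>
        (PySem.List.pyRange 0 w 1).foldl (fun out x =>
          if PySem.List.pyGetD sm (y * w + x) false = true then out
          else
            match pvB_minCheb x y (pvB_solids w h sm) with
            | none => out
            | some d =>
              if d > cap then out
              else if d = 1 ∧ (pvB_solids w h sm).any (fun s =>
                      decide (|x - s.1| = 1 ∧ |y - s.2| = 1)) = true ∧
                  ¬ ((pvB_solids w h sm).any (fun s =>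
                      decide (|x - s.1| + |y - s.2| = 1)) = true) then
                PySem.List.pySetD out (y * w + x) (some 1)
              else PySem.List.pySetD out (y * w + x) (some (d - 1))) out) out).length = out.length := by
    intro l
    induction l with
    | nil => intro out; rfl
    | cons a t ih =>
      intro out
      rw [List.foldl_cons, ih]
      have hinner : ∀ (l2 : List Int) (out2 : List (Option Int)),
          (l2.foldl (fun out x =>
            if PySem.List.pyGetD sm (a * w + x) false = true then out
            else
              match pvB_minCheb x a (pvB_solids w h sm) with
              | none => out
              | some d =>
                if d > cap then out
                else if d = 1 ∧ (pvB_solids w h sm).any (fun s =>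
                        decide (|x - s.1| = 1 ∧ |a - s.2| = 1)) = true ∧
                    ¬ ((pvB_solids w h sm).any (fun s =>
                        decide (|x - s.1| + |a - s.2| = 1)) = true) then
                  PySem.List.pySetD out (a * w + x) (some 1)
                else PySem.List.pySetD out (a * w + x) (some (d - 1))) out2).length = out2.length := by
        intro l2
        induction l2 with
        | nil => intro out2; rfl
        | cons b t2 ih2 =>
          intro out2
          rw [List.foldl_cons, ih2]
          by_cases h1 : PySem.List.pyGetD sm (a * w + b) false = true
          · rw [if_pos h1]
          · rw [if_neg h1]
            rcases hM : pvB_minCheb b a (pvB_solids w h sm) with _ | d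
            · rfl
            · dsimp only
              by_cases h2 : d > cap
              · rw [if_pos h2]
              · rw [if_neg h2]
                split
                · rw [PySem.List.length_pySetD]
                · rw [PySem.List.length_pySetD]
      exact hinner _ out
  rw [houter, List.length_replicate]

set_option maxHeartbeats 1600000 in
theorem pv_main_pos (width height : Int) (solid_mask : List Bool) (contour_rings : Int)
    (hw : 0 < width) (hh : 0 < height) (hcap : contour_rings < pvINF) :
    build_fading_contour_py width height solid_mask contour_rings =
      build_fading_contour_py_alt width height solid_mask contour_rings := by
  have hgb : (0:Int) ≤ width * height := by positivity
  have hNint : (((width * height).toNat : Nat) : Int) = width * height :=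
    Int.toNat_of_nonneg hgb
  obtain ⟨haltlen, haltval⟩ := pv_alt_char width height contour_rings solid_mask hw hh
  unfold build_fading_contour_py
  dsimp only
  obtain ⟨hlen0, hchar⟩ := pv_dist0 width height solid_mask hw hh
  set dist0 : List Int := (PySem.List.pyRange 0 height 1).foldl (fun dist y =>
      (PySem.List.pyRange 0 width 1).foldl (fun dist x =>
        if PySem.List.pyGetD solid_mask (y * width + x) false = true then
          PySem.List.pySetD dist (y * width + x) 0 else dist) dist)
      (List.replicate (width * height).toNat ((1 : Int) <<< 30)) with hd0
  set cur0 : PySem.Set Int := (PySem.List.pyRange 0 (width * height) 1).foldl (fun cur idx =>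
      if PySem.List.pyGetD dist0 idx 0 = 0 then
        (pvA_get_neighbors (PySem.Int.mod idx width) (PySem.Int.floordiv idx width)
          width height).foldl (fun cur p =>
          if PySem.List.pyGetD solid_mask (p.2 * width + p.1) false = false then
            PySem.Set.add cur (p.2 * width + p.1)
          else cur) cur
      else cur) (PySem.Set.empty : PySem.Set Int) with hc0
  obtain ⟨hcmem, hcnd⟩ := pv_cur0 width height solid_mask dist0 hw hh
    (fun i hi0 hiN => hchar i hi0 hiN)
  have hmaster : pvA_loop width height solid_mask contour_rings dist0 cur0 1 =
      pvD_loop width height contour_rings dist0 1 := by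
    apply pv_master width height contour_rings solid_mask hw hh
      (contour_rings + 1 - 1).toNat 1 dist0 cur0 (by omega) (by omega)
      (by rw [pvINF_val]; decide) hlen0
    · intro i hi0 hiN
      rw [hchar i hi0 hiN]
      by_cases hm : PySem.List.pyGetD solid_mask i false = true
      · rw [if_pos hm]
        exact ⟨Or.inr (by omega), fun _ => rfl⟩
      · rw [if_neg hm]
        exact ⟨Or.inl rfl, fun hmm => absurd hmm hm⟩
    · exact hcnd
    · intro j hF
      rw [show (1 : Int) - 1 = 0 by omega] at hF
      exact (hcmem j).mpr hF
    · intro x hx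
      left
      rw [show (1 : Int) - 1 = 0 by omega]
      exact (hcmem x).mp hx
  rw [hmaster, pv_relabel width height contour_rings solid_mask
    (pvD_loop width height contour_rings dist0 1) hw hh]
  have hdil : ∀ j : Int, 0 ≤ j → j < width * height →
      PySem.List.pyGetD (pvD_loop width height contour_rings dist0 1) j 0 =
        pvFin width solid_mask (pvB_solids width height solid_mask) contour_rings j := by
    apply pv_dil_loop width height contour_rings solid_mask hw hh hcap
      (contour_rings + 1 - 1).toNat 1 dist0 (by omega) (by omega) hlen0
    · intro j hj0 hjN
      rw [hchar j hj0 hjN]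
      unfold pvVal
      by_cases hsm : PySem.List.pyGetD solid_mask j false = true
      · rw [if_pos hsm, if_pos hsm]
      · rw [if_neg hsm, if_neg hsm]
        rcases hM : pvMI width (pvB_solids width height solid_mask) j with _ | m
        · rfl
        · have hpos := pv_MI_pos width height solid_mask j m hw hh hj0 hjN hsm hM
          dsimp only
          rw [if_neg (by omega : ¬ m < 1)]
    · intro j hj0 hjN hns m hM hmlt
      have hpos := pv_MI_pos width height solid_mask j m hw hh hj0 hjN hns hM
      omega
  apply List.ext_getElem
  · rw [List.length_map, PySem.List.length_pyRange_one, haltlen]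
    omega
  · intro k h1 h2
    have hk0 : (0:Int) ≤ (k : Int) := by omega
    have hkN : (k : Int) < width * height := by
      rw [List.length_map, PySem.List.length_pyRange_one] at h1
      omega
    rw [List.getElem_map, PySem.List.getElem_pyRange_one 0 (width * height) k
      (by rw [PySem.List.length_pyRange_one]; omega)]
    rw [show (0 : Int) + (k : Int) = (k : Int) by omega]
    rw [← pv_getD_eq_getElem' _ (none : Option Int) k (by rw [haltlen]; omega),
      haltval (k : Int) hk0 hkN]
    exact pv_label_eq width height contour_rings solid_mask
      (pvD_loop width height contour_rings dist0 1) hw hh hcap hdil (k : Int) hk0 hkN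

set_option maxHeartbeats 1600000 in
theorem pv_main_degenerate (width height : Int) (solid_mask : List Bool) (contour_rings : Int)
    (hnp : ¬ (0 < width ∧ 0 < height)) :
    build_fading_contour_py width height solid_mask contour_rings =
      build_fading_contour_py_alt width height solid_mask contour_rings := by
  by_cases hwh : width * height ≤ 0
  · have hB : build_fading_contour_py_alt width height solid_mask contour_rings = [] := by
      have := pv_alt_len width height solid_mask contour_rings
      rw [Int.toNat_of_nonpos hwh] at this
      exact List.length_eq_zero_iff.mp this
    rw [hB]
    unfold build_fading_contour_py
    dsimp only
    rw [Int.toNat_of_nonpos hwh, PySem.List.pyRange_one_eq_nil hwh]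
    simp
  · have hneg : width < 0 ∧ height < 0 := by
      rcases Int.mul_pos_iff.mp (by omega : 0 < width * height) with hp | hn
      · exact absurd ⟨hp.1, hp.2⟩ hnp
      · exact hn
    have hNint : (((width * height).toNat : Nat) : Int) = width * height :=
      Int.toNat_of_nonneg (by omega)
    have hB : build_fading_contour_py_alt width height solid_mask contour_rings =
        List.replicate (width * height).toNat (none : Option Int) := by
      unfold build_fading_contour_py_alt
      dsimp only
      rw [PySem.List.pyRange_one_eq_nil (by omega : height ≤ (0:Int)), List.foldl_nil]
    rw [hB]
    unfold build_fading_contour_py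
    dsimp only
    rw [PySem.List.pyRange_one_eq_nil (by omega : height ≤ (0:Int)), List.foldl_nil]
    -- the seed frontier is empty: every distance stays INF
    have hcur : (PySem.List.pyRange 0 (width * height) 1).foldl (fun cur idx =>
        if PySem.List.pyGetD (List.replicate (width * height).toNat ((1:Int) <<< 30)) idx 0 = 0 then
          (pvA_get_neighbors (PySem.Int.mod idx width) (PySem.Int.floordiv idx width)
            width height).foldl (fun cur p =>
            if PySem.List.pyGetD solid_mask (p.2 * width + p.1) false = false then
              PySem.Set.add cur (p.2 * width + p.1)
            else cur) cur
        else cur) (PySem.Set.empty : PySem.Set Int) = (PySem.Set.empty : PySem.Set Int) := by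
      have hc := PySem.List.foldl_congr_mem (PySem.List.pyRange 0 (width * height) 1)
        (fun (cur : PySem.Set Int) idx =>
          if PySem.List.pyGetD (List.replicate (width * height).toNat ((1:Int) <<< 30)) idx 0 = 0 then
            (pvA_get_neighbors (PySem.Int.mod idx width) (PySem.Int.floordiv idx width)
              width height).foldl (fun cur p =>
              if PySem.List.pyGetD solid_mask (p.2 * width + p.1) false = false then
                PySem.Set.add cur (p.2 * width + p.1)
              else cur) cur
          else cur)
        (fun (cur : PySem.Set Int) _ => cur) (PySem.Set.empty : PySem.Set Int)
        (by
          intro acc idx hidx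
          rw [PySem.List.mem_pyRange_one] at hidx
          beta_reduce
          rw [if_neg ?_]
          rw [pv_getD_replicate (width * height).toNat ((1:Int) <<< 30) idx 0 hidx.1 (by omega)]
          decide)
      rw [hc, PySem.List.foldl_ignore]
    rw [hcur, pvA_loop_empty]
    -- the relabel pass writes none everywhere
    have hc2 := PySem.List.foldl_congr_mem (PySem.List.pyRange 0 (width * height) 1)
      (fun (result : List (Option Int)) idx =>
        if PySem.List.pyGetD solid_mask idx false = true ∨
            PySem.List.pyGetD (List.replicate (width * height).toNat ((1:Int) <<< 30)) idx 0 = (1:Int) <<< 30 ∨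
            PySem.List.pyGetD (List.replicate (width * height).toNat ((1:Int) <<< 30)) idx 0 > contour_rings then
          PySem.List.pySetD result idx none
        else
          PySem.List.pySetD result idx
            (some (if PySem.List.pyGetD (List.replicate (width * height).toNat ((1:Int) <<< 30)) idx 0 - 1 = 0 ∧
                pvA_solid_neighbors_diagonal_only idx width height solid_mask = true then 1
              else PySem.List.pyGetD (List.replicate (width * height).toNat ((1:Int) <<< 30)) idx 0 - 1)))
      (fun (result : List (Option Int)) idx => PySem.List.pySetD result idx none)
      (List.replicate (width * height).toNat (none : Option Int))
      (by
        intro acc idx hidx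
        rw [PySem.List.mem_pyRange_one] at hidx
        beta_reduce
        rw [if_pos (Or.inr (Or.inl
          (pv_getD_replicate (width * height).toNat ((1:Int) <<< 30) idx 0 hidx.1 (by omega))))])
    rw [hc2]
    rw [PySem.List.pyRange_zero (width * height), List.foldl_map]
    obtain ⟨hlenA, hvalA⟩ := pv_fold_set_aux (fun _ => (none : Option Int))
      (width * height).toNat (none : Option Int) (width * height).toNat
      (List.replicate (width * height).toNat (none : Option Int)) (by simp) (le_refl _)
    apply List.ext_getElem
    · rw [hlenA, List.length_replicate]
    · intro k h1 h2
      have hk0 : (0:Int) ≤ (k:Int) := by omega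
      have hkN : (k:Int) < width * height := by
        rw [hlenA] at h1
        omega
      have hlhs := hvalA (k : Int) hk0
      rw [if_pos (by omega : (k:Int) < (((width * height).toNat : Nat) : Int))] at hlhs
      rw [← pv_getD_eq_getElem' _ (none : Option Int) k (by rw [hlenA]; rw [hlenA] at h1; omega), hlhs]
      rw [List.getElem_replicate]

-- ===== VERDICT (by name: the statement is the Claim_ definition above) =====
theorem build_fading_contour_py_spec : Claim_equal_build_fading_contour_py := by
  intro width height solid_mask contour_rings _ hpre
  unfold Spec_build_fading_contour_py
  unfold Pre_build_fading_contour_py at hpre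
  by_cases hp : 0 < width ∧ 0 < height
  · exact pv_main_pos width height solid_mask contour_rings hp.1 hp.2
      (by rw [pvINF_val]; exact hpre.2)
  · exact pv_main_degenerate width height solid_mask contour_rings hp
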